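-- pv_equiv track=rewrite | github.com/Abhinav-Reddy-k/DAA | homo_lobster.py | construct_lobster_graph
-- ===== SOURCE A (Python) =====
-- def construct_lobster_graph(n, p):
--     # Initialize an empty adjacency list for the graph
--     adjacency_list = {}
--
--     # Path graph vertices: v_1, v_2, ..., v_n
--     path_vertices = [f'v_{i + 1}' for i in range(n)]
--
--     # Add path vertices to the adjacency list
--     for vertex in path_vertices:
--         adjacency_list[vertex] = []
--
--     # Create edges for the path graph P_n
--     for i in range(n - 1):
--         # Connect v_i with v_{i+1}
--         adjacency_list[path_vertices[i]].append(path_vertices[i + 1])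
--         adjacency_list[path_vertices[i + 1]].append(path_vertices[i])
--
--     # For each path vertex, add its two unique star graphs
--     for i, vertex in enumerate(path_vertices):
--         # First star graph S_{p,i}^1
--         c_1 = f'c_{i + 1}_1'  # Central vertex of the first star graph
--         adjacency_list[c_1] = []
--         adjacency_list[vertex].append(c_1)
--         adjacency_list[c_1].append(vertex)
--
--         # Add the outer vertices of the first star graph
--         for j in range(p - 1):
--             outer_vertex = f's_{i + 1}_1_{j + 1}'
--             adjacency_list[outer_vertex] = []
--             adjacency_list[c_1].append(outer_vertex)
--             adjacency_list[outer_vertex].append(c_1)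
--
--         # Second star graph S_{p,i}^2
--         c_2 = f'c_{i + 1}_2'  # Central vertex of the second star graph
--         adjacency_list[c_2] = []
--         adjacency_list[vertex].append(c_2)
--         adjacency_list[c_2].append(vertex)
--
--         # Add the outer vertices of the second star graph
--         for j in range(p - 1):
--             outer_vertex = f's_{i + 1}_2_{j + 1}'
--             adjacency_list[outer_vertex] = []
--             adjacency_list[c_2].append(outer_vertex)
--             adjacency_list[outer_vertex].append(c_2)
--
--     return adjacency_list
-- ===== SOURCE B (Python) =====
-- def construct_lobster_graph(n, p):
--     # Different algorithm: represent the graph as an explicit undirected edge list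
--     # (each edge once, in canonical order), then turn it into an adjacency dict by a
--     # generic group-by-endpoint pass over that edge list.
--     keys = [f'v_{i + 1}' for i in range(n)]
--     for i in range(n):
--         for c in (1, 2):
--             keys.append(f'c_{i + 1}_{c}')
--             keys.extend(f's_{i + 1}_{c}_{j + 1}' for j in range(p - 1))
--     edges = [(f'v_{i + 1}', f'v_{i + 2}') for i in range(n - 1)]
--     for i in range(n):
--         for c in (1, 2):
--             edges.append((f'v_{i + 1}', f'c_{i + 1}_{c}'))
--             edges.extend((f'c_{i + 1}_{c}', f's_{i + 1}_{c}_{j + 1}') for j in range(p - 1))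
--     incidence = {}
--     for a, b in edges:
--         incidence.setdefault(a, []).append(b)
--         incidence.setdefault(b, []).append(a)
--     return {k: incidence.get(k, []) for k in keys}
-- ===== Notes on version B (the rewrite author's own statement) =====
-- stated objective: alternative
-- what changed: B represents the graph as an explicit undirected edge list built once (each edge a single time, in canonical order) and converts it to the adjacency dict by a generic group-by-endpoint pass, instead of A's three interleaved passes that create keys and do incremental bidirectional appends directly into the dict.
import Mathlib
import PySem

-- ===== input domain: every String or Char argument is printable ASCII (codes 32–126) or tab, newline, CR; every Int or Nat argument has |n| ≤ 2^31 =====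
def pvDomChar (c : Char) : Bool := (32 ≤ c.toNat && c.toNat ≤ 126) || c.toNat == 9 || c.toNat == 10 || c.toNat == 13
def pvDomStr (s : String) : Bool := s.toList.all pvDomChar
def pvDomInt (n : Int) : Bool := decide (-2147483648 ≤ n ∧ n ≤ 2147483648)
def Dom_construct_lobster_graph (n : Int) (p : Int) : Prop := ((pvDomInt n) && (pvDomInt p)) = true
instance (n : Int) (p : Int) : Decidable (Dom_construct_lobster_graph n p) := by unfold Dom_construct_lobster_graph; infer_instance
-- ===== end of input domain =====

-- B materialises the graph's undirected edge list once and derives each vertex's adjacency by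
-- scanning that global edge list, instead of A's incremental bidirectional appends (objective: alternative algorithm).

-- ===== PORT A =====
def construct_lobster_graph (n : Int) (p : Int) : List (String × List String) :=
  let adjacency_list : PySem.Dict String (List String) := PySem.Dict.empty
  let path_vertices := (PySem.List.pyRange 0 n 1).map (fun i => "v_" ++ PySem.Int.toStr (i + 1))
  let adjacency_list := path_vertices.foldl (fun d vertex => d.insert vertex []) adjacency_list
  let adjacency_list := (PySem.List.pyRange 0 (n - 1) 1).foldl (fun d i =>
    let d := d.modify (PySem.List.pyGetD path_vertices i "") [] (· ++ [PySem.List.pyGetD path_vertices (i + 1) ""])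
    d.modify (PySem.List.pyGetD path_vertices (i + 1) "") [] (· ++ [PySem.List.pyGetD path_vertices i ""])) adjacency_list
  let adjacency_list := (PySem.List.enumerate path_vertices).foldl (fun d iv =>
    let i := iv.1
    let vertex := iv.2
    let c_1 := "c_" ++ PySem.Int.toStr (i + 1) ++ "_1"
    let d := d.insert c_1 []
    let d := d.modify vertex [] (· ++ [c_1])
    let d := d.modify c_1 [] (· ++ [vertex])
    let d := (PySem.List.pyRange 0 (p - 1) 1).foldl (fun d j =>
      let outer_vertex := "s_" ++ PySem.Int.toStr (i + 1) ++ "_1_" ++ PySem.Int.toStr (j + 1)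
      let d := d.insert outer_vertex []
      let d := d.modify c_1 [] (· ++ [outer_vertex])
      d.modify outer_vertex [] (· ++ [c_1])) d
    let c_2 := "c_" ++ PySem.Int.toStr (i + 1) ++ "_2"
    let d := d.insert c_2 []
    let d := d.modify vertex [] (· ++ [c_2])
    let d := d.modify c_2 [] (· ++ [vertex])
    (PySem.List.pyRange 0 (p - 1) 1).foldl (fun d j =>
      let outer_vertex := "s_" ++ PySem.Int.toStr (i + 1) ++ "_2_" ++ PySem.Int.toStr (j + 1)
      let d := d.insert outer_vertex []
      let d := d.modify c_2 [] (· ++ [outer_vertex])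
      d.modify outer_vertex [] (· ++ [c_2])) d) adjacency_list
  adjacency_list.items

-- ===== PORT B =====
def construct_lobster_graph_alt (n : Int) (p : Int) : List (String × List String) :=
  let keys := (PySem.List.pyRange 0 n 1).map (fun i => "v_" ++ PySem.Int.toStr (i + 1))
  let keys := (PySem.List.pyRange 0 n 1).foldl (fun acc i =>
    [(1 : Int), 2].foldl (fun acc c =>
      (acc ++ ["c_" ++ PySem.Int.toStr (i + 1) ++ "_" ++ PySem.Int.toStr c]) ++
        (PySem.List.pyRange 0 (p - 1) 1).map (fun j =>
          "s_" ++ PySem.Int.toStr (i + 1) ++ "_" ++ PySem.Int.toStr c ++ "_" ++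
            PySem.Int.toStr (j + 1))) acc) keys
  let edges := (PySem.List.pyRange 0 (n - 1) 1).map (fun i =>
    ("v_" ++ PySem.Int.toStr (i + 1), "v_" ++ PySem.Int.toStr (i + 2)))
  let edges := (PySem.List.pyRange 0 n 1).foldl (fun acc i =>
    [(1 : Int), 2].foldl (fun acc c =>
      (acc ++ [("v_" ++ PySem.Int.toStr (i + 1),
                "c_" ++ PySem.Int.toStr (i + 1) ++ "_" ++ PySem.Int.toStr c)]) ++
        (PySem.List.pyRange 0 (p - 1) 1).map (fun j =>
          ("c_" ++ PySem.Int.toStr (i + 1) ++ "_" ++ PySem.Int.toStr c,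
           "s_" ++ PySem.Int.toStr (i + 1) ++ "_" ++ PySem.Int.toStr c ++ "_" ++
             PySem.Int.toStr (j + 1)))) acc) edges
  let incidence := edges.foldl (fun d e =>
    (d.modify e.1 [] (· ++ [e.2])).modify e.2 [] (· ++ [e.1]))
    (PySem.Dict.empty : PySem.Dict String (List String))
  (PySem.Dict.ofList (keys.map (fun k => (k, incidence.getD k [])))).items

-- ===== PRECONDITION & SPEC =====
def Spec_construct_lobster_graph (n : Int) (p : Int) (out : List (String × List String)) : Prop := out = construct_lobster_graph_alt n p
instance (n : Int) (p : Int) (out : List (String × List String)) : Decidable (Spec_construct_lobster_graph n p out) := by unfold Spec_construct_lobster_graph; infer_instance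

-- ===== CLAIM (what is proved, stated in full; the proofs are below) =====
def Claim_equal_construct_lobster_graph : Prop := ∀ (n : Int) (p : Int), Dom_construct_lobster_graph n p → Spec_construct_lobster_graph n p (construct_lobster_graph n p)

-- ===== LEMMAS AND PROOFS =====

-- digit strings
def nds (k : Nat) : List Char := Nat.toDigits 10 k

lemma nds_isDigit {c : Char} {k : Nat} (h : c ∈ nds k) : c.isDigit = true :=
  Nat.isDigit_of_mem_toDigits (by norm_num) (by norm_num) h

lemma underscore_not_mem_nds (k : Nat) : '_' ∉ nds k := by
  intro h
  have := nds_isDigit h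
  simp [Char.isDigit] at this

lemma digitChar_inj10 {a b : Nat} (ha : a < 10) (hb : b < 10)
    (h : Nat.digitChar a = Nat.digitChar b) : a = b := by
  interval_cases a <;> interval_cases b <;> simp_all [Nat.digitChar]

lemma nds_inj : ∀ a b : Nat, nds a = nds b → a = b := by
  intro a
  induction a using Nat.strong_induction_on with
  | _ a ih =>
    intro b h
    unfold nds at h
    rw [Nat.toDigits_eq_if (by norm_num)] at h
    rw [Nat.toDigits_eq_if (b := 10) (n := b) (by norm_num)] at h
    split_ifs at h with h1 h2 h2
    · have : Nat.digitChar a = Nat.digitChar b := by injection h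
      exact digitChar_inj10 h1 h2 this
    · exfalso
      have := congrArg List.length h
      have hp : 0 < (Nat.toDigits 10 (b / 10)).length := Nat.length_toDigits_pos
      simp only [List.length_append, List.length_singleton, List.length_cons] at this
      omega
    · exfalso
      have := congrArg List.length h
      have hp : 0 < (Nat.toDigits 10 (a / 10)).length := Nat.length_toDigits_pos
      simp only [List.length_append, List.length_singleton, List.length_cons] at this
      omega
    · have hlen : (Nat.toDigits 10 (a / 10)).length = (Nat.toDigits 10 (b / 10)).length := by
        have := congrArg List.length h
        simp only [List.length_append, List.length_singleton] at this
        omega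
      obtain ⟨h3, h4⟩ := List.append_inj h hlen
      have hdiv : a / 10 = b / 10 := ih (a / 10) (by omega) (b / 10) h3
      have hmod : a % 10 = b % 10 := by
        apply digitChar_inj10 (by omega) (by omega)
        simpa using h4
      omega

lemma underscore_split {a c b d : List Char} (ha : '_' ∉ a) (hb : '_' ∉ b)
    (h : a ++ '_' :: c = b ++ '_' :: d) : a = b ∧ c = d := by
  induction a generalizing b with
  | nil =>
    cases b with
    | nil => simpa using h
    | cons y ys =>
      exfalso
      simp at h
      obtain ⟨h1, -⟩ := h
      exact hb (h1 ▸ List.mem_cons_self)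
  | cons x xs ih =>
    cases b with
    | nil =>
      exfalso
      simp at h
      obtain ⟨h1, -⟩ := h
      exact ha (h1 ▸ List.mem_cons_self)
    | cons y ys =>
      simp at h
      obtain ⟨rfl, h2⟩ := h
      have := ih (fun hm => ha (List.mem_cons_of_mem _ hm)) (fun hm => hb (List.mem_cons_of_mem _ hm)) h2
      exact ⟨by simp [this.1], this.2⟩

-- the three name families
def pvK (k : Nat) : String := "v_" ++ PySem.Int.toStr (k : Int)
def cKs (i ch : Nat) : String := "c_" ++ PySem.Int.toStr ((i : Int) + 1) ++ "_" ++ PySem.Int.toStr (ch : Int)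
def sKs (i ch j : Nat) : String :=
  "s_" ++ PySem.Int.toStr ((i : Int) + 1) ++ "_" ++ PySem.Int.toStr (ch : Int) ++ "_" ++ PySem.Int.toStr ((j : Int) + 1)

lemma toChars_natCast (k : Nat) : PySem.Int.toChars (k : Int) = nds k := by
  simp [PySem.Int.toChars, nds]

lemma pvK_toList (k : Nat) : (pvK k).toList = 'v' :: '_' :: nds k := by
  simp [pvK, String.toList_append, PySem.Int.toList_toStr, toChars_natCast]

lemma cKs_toList (i ch : Nat) : (cKs i ch).toList = 'c' :: '_' :: (nds (i + 1) ++ '_' :: nds ch) := by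
  have h1 : ((i : Int) + 1) = ((i + 1 : Nat) : Int) := by push_cast; ring
  unfold cKs
  rw [h1]
  simp only [String.toList_append, PySem.Int.toList_toStr, toChars_natCast]
  simp [List.append_assoc]

lemma sKs_toList (i ch j : Nat) :
    (sKs i ch j).toList = 's' :: '_' :: (nds (i + 1) ++ '_' :: (nds ch ++ '_' :: nds (j + 1))) := by
  have h1 : ((i : Int) + 1) = ((i + 1 : Nat) : Int) := by push_cast; ring
  have h2 : ((j : Int) + 1) = ((j + 1 : Nat) : Int) := by push_cast; ring
  unfold sKs
  rw [h1, h2]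
  simp only [String.toList_append, PySem.Int.toList_toStr, toChars_natCast]
  simp [List.append_assoc]

lemma pvK_inj {a b : Nat} : pvK a = pvK b ↔ a = b := by
  constructor
  · intro h
    rw [String.ext_iff, pvK_toList, pvK_toList] at h
    simp at h
    exact nds_inj _ _ h
  · rintro rfl; rfl

lemma cKs_inj {i ch i' ch' : Nat} : cKs i ch = cKs i' ch' ↔ i = i' ∧ ch = ch' := by
  constructor
  · intro h
    rw [String.ext_iff, cKs_toList, cKs_toList] at h
    simp at h
    obtain ⟨h1, h2⟩ := underscore_split (underscore_not_mem_nds _) (underscore_not_mem_nds _) h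
    have := nds_inj _ _ h1
    exact ⟨by omega, nds_inj _ _ h2⟩
  · rintro ⟨rfl, rfl⟩; rfl

lemma sKs_inj {i ch j i' ch' j' : Nat} : sKs i ch j = sKs i' ch' j' ↔ i = i' ∧ ch = ch' ∧ j = j' := by
  constructor
  · intro h
    rw [String.ext_iff, sKs_toList, sKs_toList] at h
    simp at h
    obtain ⟨h1, h2⟩ := underscore_split (underscore_not_mem_nds _) (underscore_not_mem_nds _) h
    obtain ⟨h3, h4⟩ := underscore_split (underscore_not_mem_nds _) (underscore_not_mem_nds _) h2
    have e1 := nds_inj _ _ h1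
    have e3 := nds_inj _ _ h3
    have e4 := nds_inj _ _ h4
    exact ⟨by omega, e3, by omega⟩
  · rintro ⟨rfl, rfl, rfl⟩; rfl

lemma pvK_ne_cKs (a i ch : Nat) : ¬ (pvK a = cKs i ch) := by
  rw [String.ext_iff, pvK_toList, cKs_toList]; simp

lemma cKs_ne_pvK (i ch a : Nat) : ¬ (cKs i ch = pvK a) := fun h => pvK_ne_cKs a i ch h.symm

lemma pvK_ne_sKs (a i ch j : Nat) : ¬ (pvK a = sKs i ch j) := by
  rw [String.ext_iff, pvK_toList, sKs_toList]; simp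

lemma sKs_ne_pvK (i ch j a : Nat) : ¬ (sKs i ch j = pvK a) := fun h => pvK_ne_sKs a i ch j h.symm

lemma cKs_ne_sKs (i ch i' ch' j : Nat) : ¬ (cKs i ch = sKs i' ch' j) := by
  rw [String.ext_iff, cKs_toList, sKs_toList]; simp

lemma sKs_ne_cKs (i' ch' j i ch : Nat) : ¬ (sKs i' ch' j = cKs i ch) := fun h => cKs_ne_sKs i ch i' ch' j h.symm

-- a small operation language for A's dict-building passes
inductive LOp where
  | ins : String → LOp
  | app : String → String → LOp
deriving DecidableEq, Repr

def lopKey : LOp → String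
  | .ins k => k
  | .app k _ => k

def lapply (d : PySem.Dict String (List String)) : LOp → PySem.Dict String (List String)
  | .ins k => d.insert k []
  | .app k v => d.modify k [] (· ++ [v])

def lrun (ops : List LOp) (d : PySem.Dict String (List String)) : PySem.Dict String (List String) :=
  ops.foldl lapply d

def appsAt (k : String) (ops : List LOp) : List String :=
  ops.filterMap fun o => match o with
    | .app k' v => if k' = k then some v else none
    | _ => none

def hasIns (k : String) : List LOp → Bool
  | [] => false
  | .ins k' :: r => k' == k || hasIns k r
  | .app _ _ :: r => hasIns k r

def hasApp (k : String) : List LOp → Bool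
  | [] => false
  | .ins _ :: r => hasApp k r
  | .app k' _ :: r => k' == k || hasApp k r

def okAt (k : String) : List LOp → Bool
  | [] => true
  | .ins _ :: r => okAt k r
  | .app k' _ :: r => (!(k' == k) || !hasIns k r) && okAt k r

lemma lrun_cons (o : LOp) (ops : List LOp) (d : PySem.Dict String (List String)) :
    lrun (o :: ops) d = lrun ops (lapply d o) := rfl

lemma lrun_append (l1 l2 : List LOp) (d : PySem.Dict String (List String)) :
    lrun (l1 ++ l2) d = lrun l2 (lrun l1 d) := List.foldl_append

lemma appsAt_nil (k : String) : appsAt k [] = [] := rfl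

lemma appsAt_append (k : String) (l1 l2 : List LOp) :
    appsAt k (l1 ++ l2) = appsAt k l1 ++ appsAt k l2 := List.filterMap_append

lemma hasIns_append (k : String) (l1 l2 : List LOp) :
    hasIns k (l1 ++ l2) = (hasIns k l1 || hasIns k l2) := by
  induction l1 with
  | nil => simp [hasIns]
  | cons o r ih => cases o <;> simp [hasIns, ih, Bool.or_assoc]

lemma hasApp_append (k : String) (l1 l2 : List LOp) :
    hasApp k (l1 ++ l2) = (hasApp k l1 || hasApp k l2) := by
  induction l1 with
  | nil => simp [hasApp]
  | cons o r ih => cases o <;> simp [hasApp, ih, Bool.or_assoc]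

lemma okAt_append (k : String) (l1 l2 : List LOp) :
    okAt k (l1 ++ l2) = (okAt k l1 && okAt k l2 && (!hasApp k l1 || !hasIns k l2)) := by
  induction l1 with
  | nil => simp [okAt, hasApp]
  | cons o r ih =>
    cases o with
    | ins k' => simp [okAt, hasApp, ih]
    | app k' v =>
      simp only [List.cons_append, okAt, hasApp, ih, hasIns_append]
      cases h1 : (k' == k) <;> cases h2 : hasIns k r <;> cases h3 : hasIns k l2 <;>
        cases h4 : hasApp k r <;> simp

lemma okAt_of_no_ins {k : String} {ops : List LOp} (h : hasIns k ops = false) : okAt k ops = true := by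
  induction ops with
  | nil => rfl
  | cons o r ih =>
    cases o with
    | ins k' =>
      simp [hasIns] at h
      simp [okAt, ih h.2]
    | app k' v =>
      simp [hasIns] at h
      simp [okAt, h, ih h]

lemma noMention {k : String} {ops : List LOp} (h : ∀ o ∈ ops, lopKey o ≠ k) :
    appsAt k ops = [] ∧ hasIns k ops = false ∧ hasApp k ops = false ∧ okAt k ops = true := by
  induction ops with
  | nil => exact ⟨rfl, rfl, rfl, rfl⟩
  | cons o r ih =>
    have hr := ih fun o ho => h o (List.mem_cons_of_mem _ ho)
    have ho := h o List.mem_cons_self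
    obtain ⟨e1, e2, e3, e4⟩ := hr
    cases o with
    | ins k' =>
      simp [lopKey] at ho
      unfold appsAt at e1 ⊢
      refine ⟨?_, ?_, ?_, ?_⟩
      · simpa [List.filterMap_cons] using e1
      · simp [hasIns, ho, e2]
      · simp [hasApp, e3]
      · simp [okAt, e4]
    | app k' v =>
      simp [lopKey] at ho
      unfold appsAt at e1 ⊢
      refine ⟨?_, ?_, ?_, ?_⟩
      · simpa [List.filterMap_cons, ho] using e1
      · simp [hasIns, e2]
      · simp [hasApp, ho, e3]
      · simp [okAt, ho, e4]

lemma hasIns_of_mem {k : String} {ops : List LOp} (h : LOp.ins k ∈ ops) : hasIns k ops = true := by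
  induction ops with
  | nil => simp at h
  | cons o r ih =>
    rcases List.mem_cons.1 h with rfl | hm
    · simp [hasIns]
    · cases o <;> simp [hasIns, ih hm]

lemma getD_lrun (k : String) : ∀ (ops : List LOp) (d : PySem.Dict String (List String)),
    okAt k ops = true →
    (lrun ops d).getD k [] = (if hasIns k ops then [] else d.getD k []) ++ appsAt k ops := by
  intro ops
  induction ops with
  | nil => intro d _; simp [lrun, hasIns, appsAt]
  | cons o r ih =>
    intro d hok
    cases o with
    | ins k' =>
      rw [lrun_cons]
      simp only [okAt] at hok
      rw [ih _ hok]
      by_cases hk : k' = k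
      · subst hk
        by_cases hh : hasIns k' r <;>
          simp [lapply, hasIns, appsAt, List.filterMap_cons, PySem.Dict.getD_insert_self, hh]
      · have hne : k ≠ k' := fun h => hk h.symm
        simp [lapply, hasIns, appsAt, List.filterMap_cons, hk,
          PySem.Dict.getD_insert_of_ne _ _ _ hne]
    | app k' v =>
      rw [lrun_cons]
      simp only [okAt, Bool.and_eq_true, Bool.or_eq_true, Bool.not_eq_true', beq_eq_false_iff_ne,
        Bool.not_eq_true] at hok
      obtain ⟨h1, h2⟩ := hok
      rw [ih _ h2]
      by_cases hk : k' = k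
      · subst hk
        have hni : hasIns k' r = false := by
          rcases h1 with h | h
          · exact absurd rfl h
          · exact h
        simp [lapply, hasIns, appsAt, List.filterMap_cons, hni,
          PySem.Dict.getD_modify_self]
      · have hne : k ≠ k' := fun h => hk h.symm
        simp [lapply, hasIns, appsAt, List.filterMap_cons, hk,
          PySem.Dict.getD_modify_of_ne _ _ _ hne]

lemma keys_lapply (d : PySem.Dict String (List String)) (o : LOp) :
    (lapply d o).keys = PySem.Set.add d.keys (lopKey o) := by
  cases o with
  | ins k =>
    by_cases hc : d.contains k = true
    · rw [lapply, PySem.Dict.keys_insert_of_contains _ _ hc, lopKey,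
        PySem.Set.add_of_mem ((PySem.Dict.contains_iff_mem_keys d k).1 hc)]
    · have hc' : d.contains k = false := by simpa using hc
      rw [lapply, PySem.Dict.keys_insert_of_not_contains _ _ hc', lopKey,
        PySem.Set.add_of_not_mem (fun hm => by simp [(PySem.Dict.contains_iff_mem_keys d k).2 hm] at hc')]
  | app k v =>
    rw [lapply, PySem.Dict.keys_modify]
    by_cases hc : d.contains k = true
    · rw [PySem.Dict.keys_insert_of_contains _ _ hc, lopKey,
        PySem.Set.add_of_mem ((PySem.Dict.contains_iff_mem_keys d k).1 hc)]
    · have hc' : d.contains k = false := by simpa using hc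
      rw [PySem.Dict.keys_insert_of_not_contains _ _ hc', lopKey,
        PySem.Set.add_of_not_mem (fun hm => by simp [(PySem.Dict.contains_iff_mem_keys d k).2 hm] at hc')]

lemma keys_lrun : ∀ (ops : List LOp) (d : PySem.Dict String (List String)),
    (lrun ops d).keys = PySem.Set.update d.keys (ops.map lopKey) := by
  intro ops
  induction ops with
  | nil => intro d; simp [lrun, PySem.Set.update]
  | cons o r ih =>
    intro d
    rw [lrun_cons, ih, List.map_cons, PySem.Set.update_cons, keys_lapply]

lemma flatMap_range_two {α : Type} (g : Nat → List α) (N b a : Nat) (u v : List α) (hba : b ≤ a)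
    (h : ∀ t, t < N → g t = (if t = b then u else []) ++ (if t = a then v else [])) :
    (List.range N).flatMap g = (if b < N then u else []) ++ (if a < N then v else []) := by
  induction N with
  | zero => simp
  | succ N ih =>
    rw [List.range_succ, List.flatMap_append, ih (fun t ht => h t (by omega)),
      List.flatMap_singleton, h N (by omega)]
    clear h ih
    split_ifs <;> simp_all <;> omega

lemma flatMap_range_single {α : Type} (g : Nat → List α) (N i : Nat) (hi : i < N)
    (h : ∀ t, t < N → t ≠ i → g t = []) : (List.range N).flatMap g = g i := by
  have h2 := flatMap_range_two g N i i (g i) [] (le_refl i) (fun t ht => by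
    by_cases hti : t = i
    · subst hti; simp
    · simp [hti, h t ht hti])
  rw [h2, if_pos hi, if_pos hi, List.append_nil]

lemma noMention_flatMap {k : String} {N : Nat} {g : Nat → List LOp}
    (h : ∀ t, t < N → ∀ o ∈ g t, lopKey o ≠ k) :
    appsAt k ((List.range N).flatMap g) = [] ∧ hasIns k ((List.range N).flatMap g) = false ∧
    hasApp k ((List.range N).flatMap g) = false ∧ okAt k ((List.range N).flatMap g) = true := by
  apply noMention
  intro o ho
  rw [List.mem_flatMap] at ho
  obtain ⟨t, ht, hot⟩ := ho
  exact h t (List.mem_range.1 ht) o hot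

lemma single_block {k : String} {N i : Nat} (g : Nat → List LOp) (hi : i < N)
    (h : ∀ t, t < N → t ≠ i → ∀ o ∈ g t, lopKey o ≠ k) :
    appsAt k ((List.range N).flatMap g) = appsAt k (g i) ∧
    hasIns k ((List.range N).flatMap g) = hasIns k (g i) ∧
    okAt k ((List.range N).flatMap g) = okAt k (g i) := by
  induction N with
  | zero => omega
  | succ N ih =>
    rw [List.range_succ, List.flatMap_append, List.flatMap_singleton]
    by_cases hiN : i = N
    · subst hiN
      obtain ⟨e1, e2, e3, e4⟩ := noMention_flatMap (g := g) (N := i)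
        (fun t ht o ho => h t (by omega) (by omega) o ho)
      rw [appsAt_append, hasIns_append, okAt_append, e1, e2, e3, e4]
      simp
    · have hi' : i < N := by omega
      obtain ⟨e1, e2, e3⟩ := ih hi' (fun t ht hne o ho => h t (by omega) hne o ho)
      obtain ⟨f1, f2, f3, f4⟩ := noMention (h N (by omega) (by omega))
      rw [appsAt_append, hasIns_append, okAt_append, e1, e2, e3, f1, f2, f4]
      simp

-- A's operation sequence and the common explicit result list
def ops2b (t : Nat) : List LOp :=
  [.app (pvK (t + 1)) (pvK (t + 2)), .app (pvK (t + 2)) (pvK (t + 1))]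

def ops3leaf (i ch j : Nat) : List LOp :=
  [.ins (sKs i ch j), .app (cKs i ch) (sKs i ch j), .app (sKs i ch j) (cKs i ch)]

def ops3star (q i ch : Nat) : List LOp :=
  .ins (cKs i ch) :: .app (pvK (i + 1)) (cKs i ch) :: .app (cKs i ch) (pvK (i + 1)) ::
    (List.range q).flatMap (ops3leaf i ch)

def bigBlock (q i : Nat) : List LOp := ops3star q i 1 ++ ops3star q i 2

def opsA (m q : Nat) : List LOp :=
  (List.range m).map (fun t => .ins (pvK (t + 1))) ++
  ((List.range (m - 1)).flatMap ops2b ++ (List.range m).flatMap (bigBlock q))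

def leavesS (q i ch : Nat) : List String := (List.range q).map (sKs i ch)

def vN (m i : Nat) : List String :=
  ((if 0 < i then [pvK i] else []) ++ (if i + 1 < m then [pvK (i + 2)] else [])) ++ [cKs i 1, cKs i 2]

def starB (q i ch : Nat) : List (String × List String) :=
  (cKs i ch, pvK (i + 1) :: leavesS q i ch) :: (leavesS q i ch).map (fun l => (l, [cKs i ch]))

def specL (m q : Nat) : List (String × List String) :=
  (List.range m).map (fun i => (pvK (i + 1), vN m i)) ++
  (List.range m).flatMap (fun i => starB q i 1 ++ starB q i 2)

lemma mem_ops3star {o : LOp} {q i ch : Nat} (ho : o ∈ ops3star q i ch) :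
    lopKey o = cKs i ch ∨ lopKey o = pvK (i + 1) ∨ ∃ j, j < q ∧ lopKey o = sKs i ch j := by
  simp only [ops3star, List.mem_cons, List.mem_flatMap, List.mem_range, ops3leaf] at ho
  rcases ho with rfl | rfl | rfl | ⟨j, hj, rfl | rfl | rfl | h⟩ <;>
    simp [lopKey] <;> first
      | exact Or.inr (Or.inr ⟨j, hj, rfl⟩)
      | exact Or.inl ⟨j, hj, rfl⟩
      | simp at h

lemma mem_bigBlock {o : LOp} {q i : Nat} (ho : o ∈ bigBlock q i) :
    (∃ ch, (ch = 1 ∨ ch = 2) ∧ lopKey o = cKs i ch) ∨ lopKey o = pvK (i + 1) ∨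
    ∃ ch j, (ch = 1 ∨ ch = 2) ∧ j < q ∧ lopKey o = sKs i ch j := by
  rcases List.mem_append.1 ho with h | h
  · rcases mem_ops3star h with h | h | ⟨j, hj, h⟩
    · exact Or.inl ⟨1, Or.inl rfl, h⟩
    · exact Or.inr (Or.inl h)
    · exact Or.inr (Or.inr ⟨1, j, Or.inl rfl, hj, h⟩)
  · rcases mem_ops3star h with h | h | ⟨j, hj, h⟩
    · exact Or.inl ⟨2, Or.inr rfl, h⟩
    · exact Or.inr (Or.inl h)
    · exact Or.inr (Or.inr ⟨2, j, Or.inr rfl, hj, h⟩)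

lemma ins_map_facts (k : String) : ∀ (xs : List String),
    appsAt k (xs.map LOp.ins) = [] ∧ hasApp k (xs.map LOp.ins) = false ∧
    okAt k (xs.map LOp.ins) = true := by
  intro xs
  induction xs with
  | nil => exact ⟨rfl, rfl, rfl⟩
  | cons x r ih =>
    refine ⟨?_, ?_, ?_⟩ <;> simp [appsAt, hasApp, okAt, List.filterMap_cons, ih.1, ih.2.1, ih.2.2] <;>
      simpa [appsAt] using ih.1

lemma hasIns_flatMap (k : String) {α : Type} (g : α → List LOp) (l : List α) :
    hasIns k (l.flatMap g) = l.any (fun t => hasIns k (g t)) := by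
  induction l with
  | nil => rfl
  | cons x r ih => simp [List.flatMap_cons, hasIns_append, ih]

lemma noMention_ops2b {k : String} (hk : ∀ a : Nat, k ≠ pvK a) (N : Nat) :
    appsAt k ((List.range N).flatMap ops2b) = [] ∧ hasIns k ((List.range N).flatMap ops2b) = false ∧
    hasApp k ((List.range N).flatMap ops2b) = false ∧ okAt k ((List.range N).flatMap ops2b) = true := by
  apply noMention_flatMap
  intro t ht o ho h
  simp only [ops2b, List.mem_cons] at ho
  rcases ho with rfl | rfl | h' <;> first
    | exact hk _ h.symm
    | simp at h'

lemma hasIns_pv_K2 (i N : Nat) : hasIns (pvK i) ((List.range N).flatMap ops2b) = false := by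
  rw [hasIns_flatMap]
  simp [ops2b, hasIns]

lemma appsAt_cons_ins (k k' : String) (r : List LOp) : appsAt k (.ins k' :: r) = appsAt k r := by
  simp [appsAt, List.filterMap_cons]

lemma appsAt_cons_app_eq {k k' : String} (h : k' = k) (v : String) (r : List LOp) :
    appsAt k (.app k' v :: r) = v :: appsAt k r := by
  simp [appsAt, List.filterMap_cons, h]

lemma appsAt_cons_app_ne {k k' : String} (h : ¬ (k' = k)) (v : String) (r : List LOp) :
    appsAt k (.app k' v :: r) = appsAt k r := by
  simp [appsAt, List.filterMap_cons, h]

lemma hasIns_cons_ins_ne {k k' : String} (h : ¬ (k' = k)) (r : List LOp) :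
    hasIns k (.ins k' :: r) = hasIns k r := by
  have hb : (k' == k) = false := beq_eq_false_iff_ne.2 h
  simp [hasIns, hb]

lemma hasIns_cons_app (k k' v : String) (r : List LOp) :
    hasIns k (.app k' v :: r) = hasIns k r := rfl

lemma okAt_cons_ins (k k' : String) (r : List LOp) : okAt k (.ins k' :: r) = okAt k r := rfl

lemma okAt_cons_app_ne {k k' : String} (h : ¬ (k' = k)) (v : String) (r : List LOp) :
    okAt k (.app k' v :: r) = okAt k r := by
  have : (k' == k) = false := by simp [h]
  simp [okAt, this]

lemma okAt_cons_app_noins {k k' v : String} {r : List LOp} (h : hasIns k r = false) :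
    okAt k (.app k' v :: r) = okAt k r := by
  simp [okAt, h]

lemma hasIns_pv_K3 (i q N : Nat) : hasIns (pvK i) ((List.range N).flatMap (bigBlock q)) = false := by
  rw [hasIns_flatMap]
  simp only [List.any_eq_false]
  intro t ht
  have hleaf : ∀ ch, hasIns (pvK i) ((List.range q).flatMap (ops3leaf t ch)) = false := by
    intro ch
    rw [hasIns_flatMap]
    simp only [List.any_eq_false]
    intro j hj
    simp only [ops3leaf]
    rw [hasIns_cons_ins_ne (sKs_ne_pvK _ _ _ _), hasIns_cons_app, hasIns_cons_app]
    simp [hasIns]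
  simp only [bigBlock, hasIns_append, ops3star]
  rw [hasIns_cons_ins_ne (cKs_ne_pvK _ _ _), hasIns_cons_app, hasIns_cons_app, hleaf,
    hasIns_cons_ins_ne (cKs_ne_pvK _ _ _), hasIns_cons_app, hasIns_cons_app, hleaf]
  simp

lemma appsAt_pv_ops3star (q i ch t : Nat) :
    appsAt (pvK (i + 1)) (ops3star q t ch) = if t = i then [cKs t ch] else [] := by
  have hleaf : appsAt (pvK (i + 1)) ((List.range q).flatMap (ops3leaf t ch)) = [] := by
    refine (noMention_flatMap ?_).1
    intro j hj o ho h
    simp only [ops3leaf, List.mem_cons] at ho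
    rcases ho with rfl | rfl | rfl | h'
    · exact sKs_ne_pvK _ _ _ _ h
    · exact cKs_ne_pvK _ _ _ h
    · exact sKs_ne_pvK _ _ _ _ h
    · simp at h'
  simp only [ops3star]
  by_cases h : t = i
  · subst h
    rw [appsAt_cons_ins, appsAt_cons_app_eq rfl, appsAt_cons_app_ne (cKs_ne_pvK _ _ _), hleaf,
      if_pos rfl]
  · rw [appsAt_cons_ins, appsAt_cons_app_ne (by simp [pvK_inj]; omega),
      appsAt_cons_app_ne (cKs_ne_pvK _ _ _), hleaf, if_neg h]

lemma appsAt_flatMap (k : String) {α : Type} (g : α → List LOp) (l : List α) :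
    appsAt k (l.flatMap g) = l.flatMap (fun x => appsAt k (g x)) := by
  rw [appsAt, List.filterMap_flatMap]
  rfl

lemma hasIns_leafSeq_ne {k : String} (i ch q : Nat) (h : ∀ j, j < q → ¬ (sKs i ch j = k)) :
    hasIns k ((List.range q).flatMap (ops3leaf i ch)) = false := by
  rw [hasIns_flatMap]
  simp only [List.any_eq_false]
  intro j hj
  simp only [ops3leaf]
  rw [hasIns_cons_ins_ne (h j (List.mem_range.1 hj)), hasIns_cons_app, hasIns_cons_app]
  simp [hasIns]

lemma okAt_cK_ops3star_self (q i ch : Nat) : okAt (cKs i ch) (ops3star q i ch) = true := by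
  have hleaf : hasIns (cKs i ch) ((List.range q).flatMap (ops3leaf i ch)) = false :=
    hasIns_leafSeq_ne i ch q (fun j _ => sKs_ne_cKs _ _ _ _ _)
  simp only [ops3star]
  rw [okAt_cons_ins, okAt_cons_app_ne (pvK_ne_cKs _ _ _), okAt_cons_app_noins hleaf]
  exact okAt_of_no_ins hleaf

lemma hasIns_cK_ops3star_ne {i ch i' ch' : Nat} (h : ¬ (i' = i ∧ ch' = ch)) (q : Nat) :
    hasIns (cKs i ch) (ops3star q i' ch') = false := by
  simp only [ops3star]
  rw [hasIns_cons_ins_ne (by rw [cKs_inj]; tauto), hasIns_cons_app, hasIns_cons_app]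
  exact hasIns_leafSeq_ne _ _ _ (fun j _ => sKs_ne_cKs _ _ _ _ _)

lemma flatMap_singleton_map {α β : Type} (f : α → β) (l : List α) :
    l.flatMap (fun x => [f x]) = l.map f := by
  induction l with
  | nil => rfl
  | cons x r ih => simp [ih]

lemma appsAt_cK_ops3star (q i ch ch' : Nat) :
    appsAt (cKs i ch) (ops3star q i ch') =
      if ch' = ch then pvK (i + 1) :: leavesS q i ch else [] := by
  simp only [ops3star]
  by_cases h : ch' = ch
  · subst h
    have hleaf : appsAt (cKs i ch') ((List.range q).flatMap (ops3leaf i ch')) =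
        (List.range q).map (sKs i ch') := by
      rw [appsAt_flatMap]
      have h2 : ∀ j ∈ List.range q, appsAt (cKs i ch') (ops3leaf i ch' j) = [sKs i ch' j] := by
        intro j _
        simp only [ops3leaf]
        rw [appsAt_cons_ins, appsAt_cons_app_eq rfl, appsAt_cons_app_ne (sKs_ne_cKs _ _ _ _ _)]
        rfl
      rw [List.flatMap_congr h2, flatMap_singleton_map]
    rw [appsAt_cons_ins, appsAt_cons_app_ne (pvK_ne_cKs _ _ _), appsAt_cons_app_eq rfl, hleaf,
      if_pos rfl]
    rfl
  · have hc : ¬ (cKs i ch' = cKs i ch) := by rw [cKs_inj]; tauto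
    have hleaf : appsAt (cKs i ch) ((List.range q).flatMap (ops3leaf i ch')) = [] := by
      refine (noMention_flatMap ?_).1
      intro j hj o ho hk
      simp only [ops3leaf, List.mem_cons] at ho
      rcases ho with rfl | rfl | rfl | h'
      · exact sKs_ne_cKs _ _ _ _ _ hk
      · exact hc hk
      · exact sKs_ne_cKs _ _ _ _ _ hk
      · simp at h'
    rw [appsAt_cons_ins, appsAt_cons_app_ne (pvK_ne_cKs _ _ _), appsAt_cons_app_ne hc, hleaf,
      if_neg h]

lemma appsAt_pv_ops2b (i t : Nat) :
    appsAt (pvK (i + 1)) (ops2b t) =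
      (if t + 1 = i then [pvK i] else []) ++ (if t = i then [pvK (i + 2)] else []) := by
  simp only [ops2b]
  by_cases h1 : t = i
  · subst h1
    rw [appsAt_cons_app_eq rfl, appsAt_cons_app_ne (by rw [pvK_inj]; omega), appsAt_nil,
      if_neg (by omega), if_pos rfl]
    rfl
  · by_cases h2 : t + 1 = i
    · rw [appsAt_cons_app_ne (by rw [pvK_inj]; omega),
        appsAt_cons_app_eq (by rw [pvK_inj]; omega), appsAt_nil, if_pos h2, if_neg h1]
      have : t + 1 = i := h2
      simp [pvK_inj, this]
    · rw [appsAt_cons_app_ne (by rw [pvK_inj]; omega),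
        appsAt_cons_app_ne (by rw [pvK_inj]; omega), appsAt_nil, if_neg h2, if_neg h1]
      rfl

lemma appsAt_sK_ops3star (q i ch j : Nat) (hj : j < q) (ch' : Nat) :
    appsAt (sKs i ch j) (ops3star q i ch') = if ch' = ch then [cKs i ch] else [] := by
  simp only [ops3star]
  by_cases h : ch' = ch
  · subst h
    have hmen : ∀ t, t < q → t ≠ j → ∀ o ∈ ops3leaf i ch' t, lopKey o ≠ sKs i ch' j := by
      intro t ht htj o ho hk
      simp only [ops3leaf, List.mem_cons] at ho
      rcases ho with rfl | rfl | rfl | h'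
      · rw [lopKey, sKs_inj] at hk; omega
      · exact cKs_ne_sKs _ _ _ _ _ hk
      · rw [lopKey, sKs_inj] at hk; omega
      · simp at h'
    have hleaf : appsAt (sKs i ch' j) ((List.range q).flatMap (ops3leaf i ch')) = [cKs i ch'] := by
      rw [(single_block (k := sKs i ch' j) (ops3leaf i ch') hj hmen).1]
      simp only [ops3leaf]
      rw [appsAt_cons_ins, appsAt_cons_app_ne (cKs_ne_sKs _ _ _ _ _), appsAt_cons_app_eq rfl,
        appsAt_nil]
    rw [appsAt_cons_ins, appsAt_cons_app_ne (pvK_ne_sKs _ _ _ _),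
      appsAt_cons_app_ne (cKs_ne_sKs _ _ _ _ _), hleaf, if_pos rfl]
  · have hleaf : appsAt (sKs i ch j) ((List.range q).flatMap (ops3leaf i ch')) = [] := by
      refine (noMention_flatMap ?_).1
      intro j' hj' o ho hk
      simp only [ops3leaf, List.mem_cons] at ho
      rcases ho with rfl | rfl | rfl | h'
      · rw [lopKey, sKs_inj] at hk; omega
      · exact cKs_ne_sKs _ _ _ _ _ hk
      · rw [lopKey, sKs_inj] at hk; omega
      · simp at h'
    rw [appsAt_cons_ins, appsAt_cons_app_ne (pvK_ne_sKs _ _ _ _),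
      appsAt_cons_app_ne (cKs_ne_sKs _ _ _ _ _), hleaf, if_neg h]

lemma hasIns_sK_ops3star_ne {i ch j i' ch' : Nat} (q : Nat) (h : ¬ (i' = i ∧ ch' = ch)) :
    hasIns (sKs i ch j) (ops3star q i' ch') = false := by
  simp only [ops3star]
  rw [hasIns_cons_ins_ne (cKs_ne_sKs _ _ _ _ _), hasIns_cons_app, hasIns_cons_app]
  refine hasIns_leafSeq_ne _ _ _ (fun j' _ hk => ?_)
  rw [sKs_inj] at hk
  tauto

lemma okAt_sK_ops3star_self (q i ch j : Nat) (hj : j < q) :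
    okAt (sKs i ch j) (ops3star q i ch) = true := by
  simp only [ops3star]
  have hmen : ∀ t, t < q → t ≠ j → ∀ o ∈ ops3leaf i ch t, lopKey o ≠ sKs i ch j := by
    intro t ht htj o ho hk
    simp only [ops3leaf, List.mem_cons] at ho
    rcases ho with rfl | rfl | rfl | h'
    · rw [lopKey, sKs_inj] at hk; omega
    · exact cKs_ne_sKs _ _ _ _ _ hk
    · rw [lopKey, sKs_inj] at hk; omega
    · simp at h'
  have hleaf : okAt (sKs i ch j) ((List.range q).flatMap (ops3leaf i ch)) = true := by
    rw [(single_block (k := sKs i ch j) (ops3leaf i ch) hj hmen).2.2]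
    simp only [ops3leaf]
    rw [okAt_cons_ins, okAt_cons_app_ne (cKs_ne_sKs _ _ _ _ _),
      okAt_cons_app_noins (by rfl)]
    rfl
  rw [okAt_cons_ins, okAt_cons_app_ne (pvK_ne_sKs _ _ _ _),
    okAt_cons_app_ne (cKs_ne_sKs _ _ _ _ _)]
  exact hleaf

lemma K1_eq (m : Nat) : (List.range m).map (fun t => LOp.ins (pvK (t + 1))) =
    ((List.range m).map (fun t => pvK (t + 1))).map LOp.ins := by
  rw [List.map_map]; rfl

lemma noMention_K1 {k : String} (hk : ∀ a : Nat, k ≠ pvK a) (m : Nat) :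
    appsAt k ((List.range m).map (fun t => LOp.ins (pvK (t + 1)))) = [] ∧
    hasIns k ((List.range m).map (fun t => LOp.ins (pvK (t + 1)))) = false ∧
    hasApp k ((List.range m).map (fun t => LOp.ins (pvK (t + 1)))) = false ∧
    okAt k ((List.range m).map (fun t => LOp.ins (pvK (t + 1)))) = true := by
  apply noMention
  intro o ho
  rcases List.mem_map.1 ho with ⟨t, -, rfl⟩
  exact fun h => hk (t + 1) h.symm

lemma mention_bigBlock_ne {k : String} {q m i : Nat}
    (h1 : ∀ t ch, t < m → t ≠ i → ¬ (cKs t ch = k))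
    (h2 : ∀ t, t < m → t ≠ i → ¬ (pvK (t + 1) = k))
    (h3 : ∀ t ch j, t < m → t ≠ i → j < q → ¬ (sKs t ch j = k)) :
    ∀ t, t < m → t ≠ i → ∀ o ∈ bigBlock q t, lopKey o ≠ k := by
  intro t ht hti o ho hk
  rcases mem_bigBlock ho with ⟨ch, -, he⟩ | he | ⟨ch, j, -, hj, he⟩
  · exact h1 t ch ht hti (he ▸ hk)
  · exact h2 t ht hti (he ▸ hk)
  · exact h3 t ch j ht hti hj (he ▸ hk)

lemma getD_pv (m q i : Nat) (hi : i < m) :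
    (lrun (opsA m q) PySem.Dict.empty).getD (pvK (i + 1)) [] = vN m i := by
  have hK1 := ins_map_facts (pvK (i + 1)) ((List.range m).map (fun t => pvK (t + 1)))
  have hIns2 : hasIns (pvK (i + 1)) ((List.range (m - 1)).flatMap ops2b) = false :=
    hasIns_pv_K2 _ _
  have hIns3 : hasIns (pvK (i + 1)) ((List.range m).flatMap (bigBlock q)) = false :=
    hasIns_pv_K3 _ _ _
  have hok : okAt (pvK (i + 1)) (opsA m q) = true := by
    rw [opsA, K1_eq, okAt_append, hK1.2.2, hK1.2.1]
    have : hasIns (pvK (i + 1)) ((List.range (m - 1)).flatMap ops2b ++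
        (List.range m).flatMap (bigBlock q)) = false := by
      rw [hasIns_append, hIns2, hIns3]; rfl
    rw [okAt_of_no_ins this]
    rfl
  have hins : hasIns (pvK (i + 1)) (opsA m q) = true := by
    rw [opsA, hasIns_append]
    rw [hasIns_of_mem (List.mem_map.2 ⟨i, List.mem_range.2 hi, rfl⟩)]
    rfl
  rw [getD_lrun _ _ _ hok, hins]
  simp only [if_true]
  have hA2 : appsAt (pvK (i + 1)) ((List.range (m - 1)).flatMap ops2b) =
      (if 0 < i then [pvK i] else []) ++ (if i + 1 < m then [pvK (i + 2)] else []) := by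
    rw [appsAt_flatMap]
    cases i with
    | zero =>
      rw [flatMap_range_two _ (m - 1) 0 0 [] [pvK 2] (le_refl 0)
        (fun t ht => by rw [appsAt_pv_ops2b]; split_ifs <;> simp_all <;> omega)]
      split_ifs <;> simp_all <;> omega
    | succ i' =>
      rw [flatMap_range_two _ (m - 1) i' (i' + 1) [pvK (i' + 1)] [pvK (i' + 3)] (by omega)
        (fun t ht => by rw [appsAt_pv_ops2b]; split_ifs <;> simp_all <;> omega)]
      split_ifs <;> simp_all <;> omega
  have hA3 : appsAt (pvK (i + 1)) ((List.range m).flatMap (bigBlock q)) =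
      [cKs i 1, cKs i 2] := by
    have hmen : ∀ t, t < m → t ≠ i → ∀ o ∈ bigBlock q t, lopKey o ≠ pvK (i + 1) := by
      refine mention_bigBlock_ne (fun t ch _ _ => cKs_ne_pvK _ _ _)
        (fun t _ hti hk => ?_) (fun t ch j _ _ _ => sKs_ne_pvK _ _ _ _)
      rw [pvK_inj] at hk; omega
    rw [(single_block (bigBlock q) hi hmen).1, bigBlock, appsAt_append,
      appsAt_pv_ops3star, appsAt_pv_ops3star, if_pos rfl, if_pos rfl]
    rfl
  rw [opsA, appsAt_append, appsAt_append, K1_eq, hK1.1, hA2, hA3, vN]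
  simp

lemma hasApp_cons_ins (k k' : String) (r : List LOp) : hasApp k (.ins k' :: r) = hasApp k r := rfl

lemma hasApp_cons_app_ne {k k' : String} (h : ¬ (k' = k)) (v : String) (r : List LOp) :
    hasApp k (.app k' v :: r) = hasApp k r := by
  have hb : (k' == k) = false := beq_eq_false_iff_ne.2 h
  simp [hasApp, hb]

lemma hasApp_flatMap (k : String) {α : Type} (g : α → List LOp) (l : List α) :
    hasApp k (l.flatMap g) = l.any (fun t => hasApp k (g t)) := by
  induction l with
  | nil => rfl
  | cons x r ih => simp [List.flatMap_cons, hasApp_append, ih]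

lemma hasApp_leafSeq_ne {k : String} (i ch q : Nat) (hc : ¬ (cKs i ch = k))
    (h : ∀ j, j < q → ¬ (sKs i ch j = k)) :
    hasApp k ((List.range q).flatMap (ops3leaf i ch)) = false := by
  rw [hasApp_flatMap]
  simp only [List.any_eq_false]
  intro j hj
  simp only [ops3leaf]
  rw [hasApp_cons_ins, hasApp_cons_app_ne hc, hasApp_cons_app_ne (h j (List.mem_range.1 hj))]
  simp [hasApp]

lemma hasApp_cK_ops3star_ne {i ch i' ch' : Nat} (h : ¬ (i' = i ∧ ch' = ch)) (q : Nat) :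
    hasApp (cKs i ch) (ops3star q i' ch') = false := by
  have hc : ¬ (cKs i' ch' = cKs i ch) := by rw [cKs_inj]; tauto
  simp only [ops3star]
  rw [hasApp_cons_ins, hasApp_cons_app_ne (pvK_ne_cKs _ _ _), hasApp_cons_app_ne hc]
  exact hasApp_leafSeq_ne _ _ _ hc (fun j _ => sKs_ne_cKs _ _ _ _ _)

lemma hasApp_sK_ops3star_ne {i ch j i' ch' : Nat} (h : ¬ (ch' = ch)) (q : Nat) :
    hasApp (sKs i ch j) (ops3star q i' ch') = false := by
  have hc : ¬ (cKs i' ch' = sKs i ch j) := cKs_ne_sKs _ _ _ _ _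
  simp only [ops3star]
  rw [hasApp_cons_ins, hasApp_cons_app_ne (pvK_ne_sKs _ _ _ _), hasApp_cons_app_ne hc]
  refine hasApp_leafSeq_ne _ _ _ hc (fun j' _ hk => ?_)
  rw [sKs_inj] at hk
  tauto

lemma getD_cK (m q i ch : Nat) (hi : i < m) (hch : ch = 1 ∨ ch = 2) :
    (lrun (opsA m q) PySem.Dict.empty).getD (cKs i ch) [] = pvK (i + 1) :: leavesS q i ch := by
  have hK1 := noMention_K1 (fun a => cKs_ne_pvK i ch a) m
  have hK2 := noMention_ops2b (fun a => cKs_ne_pvK i ch a) (m - 1)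
  have hmen : ∀ t, t < m → t ≠ i → ∀ o ∈ bigBlock q t, lopKey o ≠ cKs i ch := by
    refine mention_bigBlock_ne (fun t ch' _ hti hk => ?_) (fun t _ _ => pvK_ne_cKs _ _ _)
      (fun t ch' j _ _ _ => sKs_ne_cKs _ _ _ _ _)
    rw [cKs_inj] at hk; omega
  have hsb := single_block (bigBlock q) hi hmen
  have hA3 : appsAt (cKs i ch) ((List.range m).flatMap (bigBlock q)) =
      pvK (i + 1) :: leavesS q i ch := by
    rw [hsb.1, bigBlock, appsAt_append, appsAt_cK_ops3star, appsAt_cK_ops3star]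
    rcases hch with rfl | rfl
    · rw [if_pos rfl, if_neg (by omega)]
      simp [leavesS]
    · rw [if_neg (by omega), if_pos rfl]
      simp [leavesS]
  have hokBlock : okAt (cKs i ch) (bigBlock q i) = true := by
    rw [bigBlock, okAt_append]
    rcases hch with rfl | rfl
    · rw [okAt_cK_ops3star_self,
        okAt_of_no_ins (hasIns_cK_ops3star_ne (show ¬ (i = i ∧ 2 = 1) by simp) q),
        hasIns_cK_ops3star_ne (show ¬ (i = i ∧ 2 = 1) by simp) q]
      simp
    · rw [okAt_cK_ops3star_self,
        okAt_of_no_ins (hasIns_cK_ops3star_ne (show ¬ (i = i ∧ 1 = 2) by simp) q),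
        hasApp_cK_ops3star_ne (show ¬ (i = i ∧ 1 = 2) by simp) q]
      simp
  have hok : okAt (cKs i ch) (opsA m q) = true := by
    rw [opsA, okAt_append, hK1.2.2.2, hK1.2.2.1, okAt_append, hK2.2.2.2, hK2.2.2.1,
      hsb.2.2, hokBlock]
    rfl
  have hins : hasIns (cKs i ch) (opsA m q) = true := by
    have hmem : LOp.ins (cKs i ch) ∈ (List.range m).flatMap (bigBlock q) := by
      refine List.mem_flatMap.2 ⟨i, List.mem_range.2 hi, ?_⟩
      rcases hch with rfl | rfl <;> simp [bigBlock, ops3star]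
    rw [opsA, hasIns_append, hasIns_append, hasIns_of_mem hmem]
    simp
  rw [getD_lrun _ _ _ hok, hins]
  simp only [if_true]
  rw [opsA, appsAt_append, appsAt_append, hK1.1, hK2.1, hA3]
  rfl

lemma getD_sK (m q i ch j : Nat) (hi : i < m) (hj : j < q) (hch : ch = 1 ∨ ch = 2) :
    (lrun (opsA m q) PySem.Dict.empty).getD (sKs i ch j) [] = [cKs i ch] := by
  have hK1 := noMention_K1 (fun a => sKs_ne_pvK i ch j a) m
  have hK2 := noMention_ops2b (fun a => sKs_ne_pvK i ch j a) (m - 1)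
  have hmen : ∀ t, t < m → t ≠ i → ∀ o ∈ bigBlock q t, lopKey o ≠ sKs i ch j := by
    refine mention_bigBlock_ne (fun t ch' _ _ => cKs_ne_sKs _ _ _ _ _)
      (fun t _ _ => pvK_ne_sKs _ _ _ _) (fun t ch' j' _ hti _ hk => ?_)
    rw [sKs_inj] at hk; omega
  have hsb := single_block (bigBlock q) hi hmen
  have hA3 : appsAt (sKs i ch j) ((List.range m).flatMap (bigBlock q)) = [cKs i ch] := by
    rw [hsb.1, bigBlock, appsAt_append, appsAt_sK_ops3star q i ch j hj,
      appsAt_sK_ops3star q i ch j hj]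
    rcases hch with rfl | rfl
    · rw [if_pos rfl, if_neg (by omega)]
      simp
    · rw [if_neg (by omega), if_pos rfl]
      simp
  have hokBlock : okAt (sKs i ch j) (bigBlock q i) = true := by
    rw [bigBlock, okAt_append]
    rcases hch with rfl | rfl
    · rw [okAt_sK_ops3star_self q i 1 j hj,
        okAt_of_no_ins (hasIns_sK_ops3star_ne q (show ¬ (i = i ∧ 2 = 1) by simp)),
        hasIns_sK_ops3star_ne q (show ¬ (i = i ∧ 2 = 1) by simp)]
      simp
    · rw [okAt_sK_ops3star_self q i 2 j hj,
        okAt_of_no_ins (hasIns_sK_ops3star_ne q (show ¬ (i = i ∧ 1 = 2) by simp)),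
        hasApp_sK_ops3star_ne (show ¬ ((1:Nat) = 2) by simp) q]
      simp
  have hok : okAt (sKs i ch j) (opsA m q) = true := by
    rw [opsA, okAt_append, hK1.2.2.2, hK1.2.2.1, okAt_append, hK2.2.2.2, hK2.2.2.1,
      hsb.2.2, hokBlock]
    rfl
  have hins : hasIns (sKs i ch j) (opsA m q) = true := by
    have hmem : LOp.ins (sKs i ch j) ∈ (List.range m).flatMap (bigBlock q) := by
      refine List.mem_flatMap.2 ⟨i, List.mem_range.2 hi, ?_⟩
      have hin : ∀ ch', LOp.ins (sKs i ch' j) ∈ ops3star q i ch' := fun ch' => by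
        simp only [ops3star, List.mem_cons]
        exact Or.inr (Or.inr (Or.inr
          (List.mem_flatMap.2 ⟨j, List.mem_range.2 hj, by simp [ops3leaf]⟩)))
      rcases hch with rfl | rfl
      · exact List.mem_append_left _ (hin 1)
      · exact List.mem_append_right _ (hin 2)
    rw [opsA, hasIns_append, hasIns_append, hasIns_of_mem hmem]
    simp
  rw [getD_lrun _ _ _ hok, hins]
  simp only [if_true]
  rw [opsA, appsAt_append, appsAt_append, hK1.1, hK2.1, hA3]
  rfl

def blockK (q i : Nat) : List String := (cKs i 1 :: leavesS q i 1) ++ (cKs i 2 :: leavesS q i 2)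

lemma mem_blockK {x : String} {q t : Nat} (h : x ∈ blockK q t) :
    (∃ ch, x = cKs t ch) ∨ ∃ ch j, j < q ∧ x = sKs t ch j := by
  simp only [blockK, leavesS, List.mem_append, List.mem_cons, List.mem_map,
    List.mem_range] at h
  rcases h with (rfl | ⟨j, hj, rfl⟩) | (rfl | ⟨j, hj, rfl⟩)
  · exact Or.inl ⟨1, rfl⟩
  · exact Or.inr ⟨1, j, hj, rfl⟩
  · exact Or.inl ⟨2, rfl⟩
  · exact Or.inr ⟨2, j, hj, rfl⟩

lemma map_fst_starB (q i ch : Nat) : (starB q i ch).map Prod.fst = cKs i ch :: leavesS q i ch := by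
  simp only [starB, List.map_cons, List.map_map]
  rw [show (Prod.fst ∘ fun l => (l, [cKs i ch])) = id from rfl, List.map_id]

lemma specL_map_fst (m q : Nat) : (specL m q).map Prod.fst =
    (List.range m).map (fun t => pvK (t + 1)) ++ (List.range m).flatMap (blockK q) := by
  simp only [specL, List.map_append, List.map_map, List.map_flatMap]
  congr 1
  refine List.flatMap_congr (fun i _ => ?_)
  rw [map_fst_starB, map_fst_starB, blockK]

lemma update_nil_right (s : PySem.Set String) : s.update [] = s := rfl

lemma update_of_forall_mem {s : PySem.Set String} {xs : List String} (h : ∀ x ∈ xs, x ∈ s) :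
    s.update xs = s := by
  rw [PySem.Set.update_eq_append_filter, List.filter_eq_nil_iff.2, List.append_nil]
  intro y hy
  have hm : y ∈ s := h y ((PySem.Set.mem_ofList xs y).1 hy)
  simp [PySem.Set.contains_iff]
  exact hm

lemma leafSeq_keys (i ch : Nat) : ∀ (q : Nat) (s : PySem.Set String), cKs i ch ∈ s →
    (∀ j, j < q → sKs i ch j ∉ s) →
    PySem.Set.update s ((List.range q).flatMap (fun j => [sKs i ch j, cKs i ch, sKs i ch j])) =
      s ++ leavesS q i ch := by
  intro q
  induction q with
  | zero => intro s _ _; simp [PySem.Set.update, leavesS]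
  | succ q ih =>
    intro s hc hs
    rw [List.range_succ, List.flatMap_append, PySem.Set.update_append,
      ih s hc (fun j hj => hs j (by omega)), List.flatMap_singleton,
      PySem.Set.update_cons, PySem.Set.update_cons, PySem.Set.update_cons]
    have h1 : sKs i ch q ∉ s ++ leavesS q i ch := by
      intro hmem
      rcases List.mem_append.1 hmem with hm | hm
      · exact hs q (by omega) hm
      · rcases List.mem_map.1 hm with ⟨j, hj, he⟩
        rw [sKs_inj] at he
        have := List.mem_range.1 hj
        omega
    rw [PySem.Set.add_of_not_mem h1,
      PySem.Set.add_of_mem (List.mem_append_left _ (List.mem_append_left _ hc)),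
      PySem.Set.add_of_mem (List.mem_append_right _ (List.mem_singleton.2 rfl)),
      update_nil_right]
    simp [leavesS, List.range_succ]

lemma star_keys (q i ch : Nat) (s : PySem.Set String) (hpv : pvK (i + 1) ∈ s)
    (hc : cKs i ch ∉ s) (hsk : ∀ j, j < q → sKs i ch j ∉ s) :
    PySem.Set.update s ((ops3star q i ch).map lopKey) = s ++ (cKs i ch :: leavesS q i ch) := by
  have hmap : (ops3star q i ch).map lopKey =
      cKs i ch :: pvK (i + 1) :: cKs i ch ::
        (List.range q).flatMap (fun j => [sKs i ch j, cKs i ch, sKs i ch j]) := by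
    simp only [ops3star, List.map_cons, lopKey, List.map_flatMap]
    congr 1
  rw [hmap, PySem.Set.update_cons, PySem.Set.update_cons, PySem.Set.update_cons,
    PySem.Set.add_of_not_mem hc,
    PySem.Set.add_of_mem (List.mem_append_left _ hpv),
    PySem.Set.add_of_mem (List.mem_append_right _ (List.mem_singleton.2 rfl)),
    leafSeq_keys i ch q (s ++ [cKs i ch])
      (List.mem_append_right _ (List.mem_singleton.2 rfl))
      (fun j hj hmem => by
        rcases List.mem_append.1 hmem with hm | hm
        · exact hsk j hj hm
        · exact sKs_ne_cKs _ _ _ _ _ (List.mem_singleton.1 hm))]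
  simp

lemma block_keys (q i : Nat) (s : PySem.Set String) (hpv : pvK (i + 1) ∈ s)
    (hc : ∀ ch, cKs i ch ∉ s) (hsk : ∀ ch j, j < q → sKs i ch j ∉ s) :
    PySem.Set.update s ((bigBlock q i).map lopKey) = s ++ blockK q i := by
  rw [bigBlock, List.map_append, PySem.Set.update_append, star_keys q i 1 s hpv (hc 1) (hsk 1),
    star_keys q i 2 _ (List.mem_append_left _ hpv)
      (fun hmem => by
        rcases List.mem_append.1 hmem with hm | hm
        · exact hc 2 hm
        · rcases List.mem_cons.1 hm with he | hm'
          · rw [cKs_inj] at he; omega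
          · rcases List.mem_map.1 hm' with ⟨j, -, he⟩
            exact cKs_ne_sKs _ _ _ _ _ he.symm)
      (fun j hj hmem => by
        rcases List.mem_append.1 hmem with hm | hm
        · exact hsk 2 j hj hm
        · rcases List.mem_cons.1 hm with he | hm'
          · exact sKs_ne_cKs _ _ _ _ _ he
          · rcases List.mem_map.1 hm' with ⟨j', -, he⟩
            rw [sKs_inj] at he
            omega)]
  rw [blockK]
  simp

lemma blocks_keys (q m : Nat) : ∀ M, M ≤ m →
    PySem.Set.update ((List.range m).map (fun t => pvK (t + 1)))
        (((List.range M).flatMap (bigBlock q)).map lopKey) =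
      (List.range m).map (fun t => pvK (t + 1)) ++ (List.range M).flatMap (blockK q) := by
  intro M
  induction M with
  | zero => intro _; simp [update_nil_right]
  | succ M ih =>
    intro hM
    rw [List.range_succ, List.flatMap_append, List.map_append, PySem.Set.update_append,
      ih (by omega), List.flatMap_singleton]
    have hnotin : ∀ x, (∃ ch, x = cKs M ch) ∨ (∃ ch j, j < q ∧ x = sKs M ch j) →
        x ∉ (List.range m).map (fun t => pvK (t + 1)) ++ (List.range M).flatMap (blockK q) := by
      rintro x hx hmem
      rcases List.mem_append.1 hmem with hm | hm
      · rcases List.mem_map.1 hm with ⟨t, -, rfl⟩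
        rcases hx with ⟨ch, he⟩ | ⟨ch, j, -, he⟩
        · exact pvK_ne_cKs _ _ _ he
        · exact pvK_ne_sKs _ _ _ _ he
      · rcases List.mem_flatMap.1 hm with ⟨t, ht, hbt⟩
        have htM : t < M := List.mem_range.1 ht
        rcases hx with ⟨ch, rfl⟩ | ⟨ch, j, -, rfl⟩
        · rcases mem_blockK hbt with ⟨ch', he⟩ | ⟨ch', j', hj', he⟩
          · rw [cKs_inj] at he; omega
          · exact cKs_ne_sKs _ _ _ _ _ he
        · rcases mem_blockK hbt with ⟨ch', he⟩ | ⟨ch', j', hj', he⟩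
          · exact sKs_ne_cKs _ _ _ _ _ he
          · rw [sKs_inj] at he; omega
    rw [block_keys q M _
      (List.mem_append_left _ (List.mem_map.2 ⟨M, List.mem_range.2 (by omega), rfl⟩))
      (fun ch => hnotin _ (Or.inl ⟨ch, rfl⟩))
      (fun ch j hj => hnotin _ (Or.inr ⟨ch, j, hj, rfl⟩))]
    rw [List.append_assoc, List.flatMap_append, List.flatMap_singleton]

lemma pvK_succ_injective : Function.Injective (fun t : Nat => pvK (t + 1)) := by
  intro a b h
  rw [pvK_inj] at h
  omega

lemma opsA_keys (m q : Nat) :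
    PySem.Set.update [] ((opsA m q).map lopKey) = (specL m q).map Prod.fst := by
  rw [specL_map_fst, opsA, List.map_append, List.map_append, PySem.Set.update_append,
    PySem.Set.update_append]
  have h1 : PySem.Set.update ([] : PySem.Set String)
      (((List.range m).map (fun t => LOp.ins (pvK (t + 1)))).map lopKey) =
      (List.range m).map (fun t => pvK (t + 1)) := by
    rw [List.map_map, show (lopKey ∘ fun t => LOp.ins (pvK (t + 1))) = fun t => pvK (t + 1) from rfl]
    rw [PySem.Set.update_eq_append_of_disjoint _ _
      (List.Nodup.map pvK_succ_injective (List.nodup_range)) (by simp)]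
    simp
  rw [h1]
  have h2 : PySem.Set.update ((List.range m).map (fun t => pvK (t + 1)))
      (((List.range (m - 1)).flatMap ops2b).map lopKey) =
      (List.range m).map (fun t => pvK (t + 1)) := by
    apply update_of_forall_mem
    intro x hx
    rw [List.map_flatMap] at hx
    rcases List.mem_flatMap.1 hx with ⟨t, ht, hxt⟩
    have htm : t < m - 1 := List.mem_range.1 ht
    simp only [ops2b, List.map_cons, lopKey, List.map_nil, List.mem_cons] at hxt
    rcases hxt with rfl | rfl | h'
    · exact List.mem_map.2 ⟨t, List.mem_range.2 (by omega), rfl⟩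
    · exact List.mem_map.2 ⟨t + 1, List.mem_range.2 (by omega), rfl⟩
    · simp at h'
  rw [h2]
  exact blocks_keys q m m (le_refl m)

lemma nodup_specKeys (m q : Nat) : ((specL m q).map Prod.fst).Nodup := by
  rw [← opsA_keys, PySem.Set.update_nil_left]
  exact PySem.Set.nodup_ofList _

lemma pair_recover {α β : Type} (l : List (α × β)) (g : α → β) (h : ∀ p ∈ l, g p.1 = p.2) :
    (l.map Prod.fst).map (fun k => (k, g k)) = l := by
  induction l with
  | nil => rfl
  | cons p r ih =>
    simp only [List.map_cons]
    rw [h p List.mem_cons_self, ih (fun p hp => h p (List.mem_cons_of_mem _ hp))]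

lemma itemsA (m q : Nat) : (lrun (opsA m q) PySem.Dict.empty).items = specL m q := by
  have hkeys : (lrun (opsA m q) PySem.Dict.empty).keys = (specL m q).map Prod.fst := by
    rw [keys_lrun, PySem.Dict.keys_empty, opsA_keys]
  have hnd : (lrun (opsA m q) PySem.Dict.empty).keys.Nodup := by
    rw [hkeys]; exact nodup_specKeys m q
  rw [PySem.Dict.items_eq_map_keys _ hnd [], hkeys]
  apply pair_recover
  intro p hp
  rcases List.mem_append.1 hp with hm | hm
  · rcases List.mem_map.1 hm with ⟨i, hi, rfl⟩
    exact getD_pv m q i (List.mem_range.1 hi)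
  · rcases List.mem_flatMap.1 hm with ⟨i, hi, hpi⟩
    have him : i < m := List.mem_range.1 hi
    have hcase : ∀ ch, ch = 1 ∨ ch = 2 → p ∈ starB q i ch →
        (lrun (opsA m q) PySem.Dict.empty).getD p.1 [] = p.2 := by
      intro ch hch hpch
      rcases List.mem_cons.1 hpch with rfl | hm'
      · exact getD_cK m q i ch him hch
      · rcases List.mem_map.1 hm' with ⟨l, hl, rfl⟩
        rcases List.mem_map.1 hl with ⟨j, hj, rfl⟩
        exact getD_sK m q i ch j him (List.mem_range.1 hj) hch
    rcases List.mem_append.1 hpi with hm' | hm'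
    · exact hcase 1 (Or.inl rfl) hm'
    · exact hcase 2 (Or.inr rfl) hm'

lemma pyRange_zero_toNat (n : Int) :
    PySem.List.pyRange 0 n 1 = (List.range n.toNat).map (fun k : Nat => (k : Int)) := by
  by_cases h : 0 ≤ n
  · conv_lhs => rw [← Int.toNat_of_nonneg h]
    exact PySem.List.pyRange_zero_natCast n.toNat
  · rw [show n.toNat = 0 by omega]
    simp [PySem.List.pyRange]
    omega

lemma cast_succ (t : Nat) : ((t : Int) + 1) = ((t + 1 : Nat) : Int) := by push_cast; ring

lemma vkey_eq (t : Nat) : "v_" ++ PySem.Int.toStr ((t : Int) + 1) = pvK (t + 1) := by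
  rw [pvK, cast_succ]

lemma ckey_eq (t : Nat) (c : Nat) (lit : String) (hlit : lit = "_" ++ PySem.Int.toStr (c : Int)) :
    "c_" ++ PySem.Int.toStr ((t : Int) + 1) ++ lit = cKs t c := by
  rw [hlit, cKs]
  simp only [← String.append_assoc]

lemma ckey1_eq (t : Nat) : "c_" ++ PySem.Int.toStr ((t : Int) + 1) ++ "_1" = cKs t 1 :=
  ckey_eq t 1 "_1" (by decide)

lemma ckey2_eq (t : Nat) : "c_" ++ PySem.Int.toStr ((t : Int) + 1) ++ "_2" = cKs t 2 :=
  ckey_eq t 2 "_2" (by decide)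

lemma skey_eq (t c j : Nat) (lit : String)
    (hlit : lit = "_" ++ PySem.Int.toStr (c : Int) ++ "_") :
    "s_" ++ PySem.Int.toStr ((t : Int) + 1) ++ lit ++ PySem.Int.toStr ((j : Int) + 1) =
      sKs t c j := by
  rw [hlit, sKs]
  simp only [← String.append_assoc]

lemma skey1_eq (t j : Nat) :
    "s_" ++ PySem.Int.toStr ((t : Int) + 1) ++ "_1_" ++ PySem.Int.toStr ((j : Int) + 1) =
      sKs t 1 j := skey_eq t 1 j "_1_" (by decide)

lemma skey2_eq (t j : Nat) :
    "s_" ++ PySem.Int.toStr ((t : Int) + 1) ++ "_2_" ++ PySem.Int.toStr ((j : Int) + 1) =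
      sKs t 2 j := skey_eq t 2 j "_2_" (by decide)

lemma foldl_lrun {α : Type} (xs : List α) (g : α → List LOp)
    (f : PySem.Dict String (List String) → α → PySem.Dict String (List String))
    (h : ∀ d x, f d x = lrun (g x) d) :
    ∀ d, xs.foldl f d = lrun (xs.flatMap g) d := by
  induction xs with
  | nil => intro d; rfl
  | cons x r ih =>
    intro d
    rw [List.foldl_cons, List.flatMap_cons, lrun_append, ih, h]

lemma inner_fold_eq (q t c : Nat) (dI : PySem.Dict String (List String)) :
    List.foldl (fun d (j : Nat) =>
      ((d.insert (sKs t c j) []).modify (cKs t c) [] fun x => x ++ [sKs t c j]).modify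
        (sKs t c j) [] fun x => x ++ [cKs t c]) dI (List.range q) =
    lrun ((List.range q).flatMap (ops3leaf t c)) dI :=
  foldl_lrun (List.range q) (ops3leaf t c)
    (fun d (j : Nat) =>
      ((d.insert (sKs t c j) []).modify (cKs t c) [] fun x => x ++ [sKs t c j]).modify
        (sKs t c j) [] fun x => x ++ [cKs t c])
    (fun d j => rfl) dI

lemma portA_lrun (n p : Int) :
    construct_lobster_graph n p = (lrun (opsA n.toNat ((p - 1).toNat)) PySem.Dict.empty).items := by
  simp only [construct_lobster_graph]
  rw [show (PySem.List.pyRange 0 n 1).map (fun i => "v_" ++ PySem.Int.toStr (i + 1)) =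
      (List.range n.toNat).map (fun t => pvK (t + 1)) by
    rw [pyRange_zero_toNat, List.map_map]
    exact List.map_congr_left (fun t _ => vkey_eq t)]
  set m := n.toNat with hm
  set q := (p - 1).toNat with hq
  have hp1 : ∀ d0 : PySem.Dict String (List String),
      ((List.range m).map (fun t => pvK (t + 1))).foldl (fun d vertex => d.insert vertex []) d0 =
        lrun ((List.range m).map (fun t => LOp.ins (pvK (t + 1)))) d0 := by
    intro d0
    rw [List.foldl_map, foldl_lrun (List.range m) (fun t => [LOp.ins (pvK (t + 1))])
      (fun d t => d.insert (pvK (t + 1)) []) (fun d t => rfl), flatMap_singleton_map]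
  rw [hp1]
  have hp2 : ∀ d1 : PySem.Dict String (List String),
      List.foldl (fun d i =>
          (d.modify (PySem.List.pyGetD ((List.range m).map (fun t => pvK (t + 1))) i "") []
              fun x => x ++ [PySem.List.pyGetD ((List.range m).map (fun t => pvK (t + 1))) (i + 1) ""]).modify
            (PySem.List.pyGetD ((List.range m).map (fun t => pvK (t + 1))) (i + 1) "") []
            fun x => x ++ [PySem.List.pyGetD ((List.range m).map (fun t => pvK (t + 1))) i ""])
        d1 (PySem.List.pyRange 0 (n - 1)) =
      lrun ((List.range (m - 1)).flatMap ops2b) d1 := by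
    intro d1
    rw [pyRange_zero_toNat (n - 1), show (n - 1).toNat = m - 1 by omega, List.foldl_map]
    rw [PySem.List.foldl_congr_mem _ _ (fun d t => lrun (ops2b t) d) _ ?_]
    · exact foldl_lrun _ ops2b _ (fun d t => rfl) d1
    · intro acc t ht
      have htm : t < m - 1 := List.mem_range.1 ht
      rw [PySem.List.pyGetD_natCast, PySem.List.getD_map_range _ _ _ _ (by omega), cast_succ,
        PySem.List.pyGetD_natCast, PySem.List.getD_map_range _ _ _ _ (by omega)]
      rfl
  rw [hp2]
  refine congrArg PySem.Dict.items ?_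
  rw [opsA, lrun_append, lrun_append]
  generalize (lrun ((List.range (m - 1)).flatMap ops2b)
      (lrun ((List.range m).map (fun t => LOp.ins (pvK (t + 1)))) PySem.Dict.empty)) = d2
  rw [PySem.List.enumerate_eq_map_pyRange _ "",
    show PySem.List.len ((List.range m).map (fun t => pvK (t + 1))) = ((m : Nat) : Int) by
      simp [PySem.List.len],
    PySem.List.pyRange_zero_natCast, List.map_map, List.foldl_map]
  rw [PySem.List.foldl_congr_mem _ _ (fun d t => lrun (bigBlock q t) d) _ ?_]
  · exact foldl_lrun _ (bigBlock q) _ (fun d t => rfl) d2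
  · intro acc t ht
    have htm : t < m := List.mem_range.1 ht
    dsimp only [Function.comp_apply]
    rw [PySem.List.pyGetD_natCast, PySem.List.getD_map_range _ _ _ _ htm]
    rw [ckey1_eq, ckey2_eq]
    rw [pyRange_zero_toNat (p - 1), ← hq]
    simp only [List.foldl_map, skey1_eq, skey2_eq]
    rw [inner_fold_eq, inner_fold_eq]
    rw [bigBlock, lrun_append, ops3star, ops3star]
    simp only [lrun_cons]
    rfl

lemma cast_two_add (t : Nat) : ((t : Int) + 2) = ((t + 2 : Nat) : Int) := by push_cast; ring

lemma ofList_items (l : List (String × List String)) (h : (l.map Prod.fst).Nodup) :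
    (PySem.Dict.ofList l).items = l := by
  have h2 := PySem.Dict.items_foldl_insert_fresh l Prod.fst Prod.snd PySem.Dict.empty
    (fun a _ => PySem.Dict.contains_empty _) h
  simpa [PySem.Dict.ofList, PySem.Dict.update] using h2

-- ===== B-side: the edge list and neighbour extraction =====

def nbAt (k : String) (es : List (String × String)) : List String :=
  es.filterMap (fun e => if e.1 = k then some e.2 else if e.2 = k then some e.1 else none)

def edgeStar (q i ch : Nat) : List (String × String) :=
  (pvK (i + 1), cKs i ch) :: (List.range q).map (fun j => (cKs i ch, sKs i ch j))

def blockE (q i : Nat) : List (String × String) := edgeStar q i 1 ++ edgeStar q i 2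

def edgesL (m q : Nat) : List (String × String) :=
  (List.range (m - 1)).map (fun t => (pvK (t + 1), pvK (t + 2))) ++
    (List.range m).flatMap (blockE q)

lemma nbAt_cons (k : String) (e : String × String) (es : List (String × String)) :
    nbAt k (e :: es) = nbAt k [e] ++ nbAt k es := by
  simp only [nbAt, List.filterMap_cons, List.filterMap_nil]
  cases h : (if e.1 = k then some e.2 else if e.2 = k then some e.1 else none) <;> simp [h]

lemma nbAt_single (k a b : String) :
    nbAt k [(a, b)] = if a = k then [b] else if b = k then [a] else [] := by
  simp only [nbAt, List.filterMap_cons, List.filterMap_nil]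
  split_ifs <;> rfl

lemma nbAt_append (k : String) (l1 l2 : List (String × String)) :
    nbAt k (l1 ++ l2) = nbAt k l1 ++ nbAt k l2 := List.filterMap_append

lemma nbAt_map {α : Type} (k : String) (f : α → String × String) (l : List α) :
    nbAt k (l.map f) = l.flatMap (fun x => nbAt k [f x]) := by
  induction l with
  | nil => rfl
  | cons x r ih => rw [List.map_cons, List.flatMap_cons, ← ih, nbAt_cons]

lemma nbAt_flatMap {α : Type} (k : String) (g : α → List (String × String)) (l : List α) :
    nbAt k (l.flatMap g) = l.flatMap (fun x => nbAt k (g x)) := by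
  rw [nbAt, List.filterMap_flatMap]
  rfl

lemma nbAt_map_nil {α : Type} {k : String} {f : α → String × String} {l : List α}
    (h : ∀ x ∈ l, nbAt k [f x] = []) : nbAt k (l.map f) = [] := by
  rw [nbAt_map]
  exact List.flatMap_eq_nil_iff.2 h

lemma nbAt_pv_pe (i t : Nat) :
    nbAt (pvK (i + 1)) [(pvK (t + 1), pvK (t + 2))] =
      (if t + 1 = i then [pvK i] else []) ++ (if t = i then [pvK (i + 2)] else []) := by
  rw [nbAt_single]
  by_cases h1 : t = i
  · subst h1
    rw [if_pos rfl, if_pos rfl, if_neg (by omega)]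
    simp
  · rw [if_neg (by rw [pvK_inj]; omega), if_neg h1]
    by_cases h2 : t + 1 = i
    · rw [if_pos (by rw [pvK_inj]; omega), if_pos h2, List.append_nil]
      subst h2
      rfl
    · rw [if_neg (by rw [pvK_inj]; omega), if_neg h2]
      simp

lemma nbAt_pv_path (m i : Nat) (hi : i < m) :
    nbAt (pvK (i + 1)) ((List.range (m - 1)).map (fun t => (pvK (t + 1), pvK (t + 2)))) =
      (if 0 < i then [pvK i] else []) ++ (if i + 1 < m then [pvK (i + 2)] else []) := by
  rw [nbAt_map]
  cases i with
  | zero =>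
    rw [flatMap_range_two _ (m - 1) 0 0 [] [pvK 2] (le_refl 0)
      (fun t ht => by rw [nbAt_pv_pe]; split_ifs <;> simp_all <;> omega)]
    split_ifs <;> simp_all <;> omega
  | succ i' =>
    rw [flatMap_range_two _ (m - 1) i' (i' + 1) [pvK (i' + 1)] [pvK (i' + 3)] (by omega)
      (fun t ht => by rw [nbAt_pv_pe]; split_ifs <;> simp_all <;> omega)]
    split_ifs <;> simp_all <;> omega

lemma nbAt_pv_edgeStar (q i t ch : Nat) :
    nbAt (pvK (i + 1)) (edgeStar q t ch) = if t = i then [cKs t ch] else [] := by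
  rw [edgeStar, nbAt_cons, nbAt_single,
    nbAt_map_nil (fun j _ => by
      rw [nbAt_single, if_neg (cKs_ne_pvK _ _ _), if_neg (sKs_ne_pvK _ _ _ _)]),
    List.append_nil]
  by_cases h : t = i
  · subst h
    rw [if_pos rfl, if_pos rfl]
  · rw [if_neg (by rw [pvK_inj]; omega), if_neg (cKs_ne_pvK _ _ _), if_neg h]

lemma nbAt_pv_blockE (q i t : Nat) :
    nbAt (pvK (i + 1)) (blockE q t) = if t = i then [cKs i 1, cKs i 2] else [] := by
  rw [blockE, nbAt_append, nbAt_pv_edgeStar, nbAt_pv_edgeStar]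
  by_cases h : t = i
  · subst h; simp
  · simp [h]

lemma nbAt_pv (m q i : Nat) (hi : i < m) :
    nbAt (pvK (i + 1)) (edgesL m q) = vN m i := by
  rw [edgesL, nbAt_append, nbAt_pv_path m i hi, nbAt_flatMap,
    flatMap_range_single _ m i hi (fun t ht hti => by rw [nbAt_pv_blockE, if_neg hti]),
    nbAt_pv_blockE, if_pos rfl, vN]

lemma nbAt_cK_path (m i ch : Nat) :
    nbAt (cKs i ch) ((List.range (m - 1)).map (fun t => (pvK (t + 1), pvK (t + 2)))) = [] :=
  nbAt_map_nil (fun t _ => by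
    rw [nbAt_single, if_neg (pvK_ne_cKs _ _ _), if_neg (pvK_ne_cKs _ _ _)])

lemma nbAt_cK_edgeStar_ne (q i ch t ch' : Nat) (h : ¬ (t = i ∧ ch' = ch)) :
    nbAt (cKs i ch) (edgeStar q t ch') = [] := by
  rw [edgeStar, nbAt_cons, nbAt_single, if_neg (pvK_ne_cKs _ _ _),
    if_neg (by rw [cKs_inj]; tauto),
    nbAt_map_nil (fun j _ => by
      rw [nbAt_single, if_neg (by rw [cKs_inj]; tauto), if_neg (sKs_ne_cKs _ _ _ _ _)])]
  rfl

lemma nbAt_cK_edgeStar_self (q i ch : Nat) :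
    nbAt (cKs i ch) (edgeStar q i ch) = pvK (i + 1) :: leavesS q i ch := by
  rw [edgeStar, nbAt_cons, nbAt_single, if_neg (pvK_ne_cKs _ _ _), if_pos rfl, nbAt_map]
  have h2 : ∀ j ∈ List.range q, nbAt (cKs i ch) [(cKs i ch, sKs i ch j)] = [sKs i ch j] :=
    fun j _ => by rw [nbAt_single, if_pos rfl]
  rw [List.flatMap_congr h2, flatMap_singleton_map]
  rfl

lemma nbAt_cK_blockE (q i ch t : Nat) (hch : ch = 1 ∨ ch = 2) :
    nbAt (cKs i ch) (blockE q t) = if t = i then pvK (i + 1) :: leavesS q i ch else [] := by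
  rw [blockE, nbAt_append]
  by_cases h : t = i
  · subst h
    rcases hch with rfl | rfl
    · rw [nbAt_cK_edgeStar_self, nbAt_cK_edgeStar_ne q t 1 t 2 (by simp), if_pos rfl,
        List.append_nil]
    · rw [nbAt_cK_edgeStar_ne q t 2 t 1 (by simp), nbAt_cK_edgeStar_self, if_pos rfl]
      rfl
  · rw [nbAt_cK_edgeStar_ne q i ch t 1 (by tauto), nbAt_cK_edgeStar_ne q i ch t 2 (by tauto),
      if_neg h]
    rfl

lemma nbAt_cK (m q i ch : Nat) (hi : i < m) (hch : ch = 1 ∨ ch = 2) :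
    nbAt (cKs i ch) (edgesL m q) = pvK (i + 1) :: leavesS q i ch := by
  rw [edgesL, nbAt_append, nbAt_cK_path, nbAt_flatMap,
    flatMap_range_single _ m i hi (fun t ht hti => by rw [nbAt_cK_blockE q i ch t hch, if_neg hti]),
    nbAt_cK_blockE q i ch i hch, if_pos rfl]
  rfl

lemma nbAt_sK_path (m i ch j : Nat) :
    nbAt (sKs i ch j) ((List.range (m - 1)).map (fun t => (pvK (t + 1), pvK (t + 2)))) = [] :=
  nbAt_map_nil (fun t _ => by
    rw [nbAt_single, if_neg (pvK_ne_sKs _ _ _ _), if_neg (pvK_ne_sKs _ _ _ _)])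

lemma nbAt_sK_edgeStar (q i ch j t ch' : Nat) (hj : j < q) :
    nbAt (sKs i ch j) (edgeStar q t ch') = if t = i ∧ ch' = ch then [cKs i ch] else [] := by
  rw [edgeStar, nbAt_cons, nbAt_single, if_neg (pvK_ne_sKs _ _ _ _),
    if_neg (cKs_ne_sKs _ _ _ _ _), List.nil_append]
  by_cases h : t = i ∧ ch' = ch
  · obtain ⟨rfl, rfl⟩ := h
    rw [nbAt_map, flatMap_range_single _ q j hj (fun j' hj' hne => by
        rw [nbAt_single, if_neg (cKs_ne_sKs _ _ _ _ _), if_neg (by rw [sKs_inj]; tauto)]),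
      nbAt_single, if_neg (cKs_ne_sKs _ _ _ _ _), if_pos rfl, if_pos ⟨rfl, rfl⟩]
  · rw [nbAt_map_nil (fun j' _ => by
        rw [nbAt_single, if_neg (cKs_ne_sKs _ _ _ _ _), if_neg (by rw [sKs_inj]; tauto)]),
      if_neg h]

lemma nbAt_sK_blockE (q i ch j t : Nat) (hj : j < q) (hch : ch = 1 ∨ ch = 2) :
    nbAt (sKs i ch j) (blockE q t) = if t = i then [cKs i ch] else [] := by
  rw [blockE, nbAt_append, nbAt_sK_edgeStar q i ch j t 1 hj, nbAt_sK_edgeStar q i ch j t 2 hj]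
  by_cases h : t = i
  · subst h
    rcases hch with rfl | rfl <;> simp
  · simp [h]

lemma nbAt_sK (m q i ch j : Nat) (hi : i < m) (hj : j < q) (hch : ch = 1 ∨ ch = 2) :
    nbAt (sKs i ch j) (edgesL m q) = [cKs i ch] := by
  rw [edgesL, nbAt_append, nbAt_sK_path, nbAt_flatMap,
    flatMap_range_single _ m i hi (fun t ht hti => by
      rw [nbAt_sK_blockE q i ch j t hj hch, if_neg hti]),
    nbAt_sK_blockE q i ch j i hj hch, if_pos rfl, List.nil_append]

lemma itemsB (m q : Nat) :
    ((specL m q).map Prod.fst).map (fun k => (k, nbAt k (edgesL m q))) = specL m q := by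
  apply pair_recover
  intro p hp
  rcases List.mem_append.1 hp with hm | hm
  · rcases List.mem_map.1 hm with ⟨i, hi, rfl⟩
    exact nbAt_pv m q i (List.mem_range.1 hi)
  · rcases List.mem_flatMap.1 hm with ⟨i, hi, hpi⟩
    have him : i < m := List.mem_range.1 hi
    have hcase : ∀ ch, ch = 1 ∨ ch = 2 → p ∈ starB q i ch → nbAt p.1 (edgesL m q) = p.2 := by
      intro ch hch hpch
      rcases List.mem_cons.1 hpch with rfl | hm'
      · exact nbAt_cK m q i ch him hch
      · rcases List.mem_map.1 hm' with ⟨l, hl, rfl⟩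
        rcases List.mem_map.1 hl with ⟨j, hj, rfl⟩
        exact nbAt_sK m q i ch j him (List.mem_range.1 hj) hch
    rcases List.mem_append.1 hpi with hm' | hm'
    · exact hcase 1 (Or.inl rfl) hm'
    · exact hcase 2 (Or.inr rfl) hm'

def opsE (es : List (String × String)) : List LOp :=
  es.flatMap (fun e => [.app e.1 e.2, .app e.2 e.1])

lemma foldl_inc (es : List (String × String)) (d : PySem.Dict String (List String)) :
    es.foldl (fun d e =>
      (d.modify e.1 [] (· ++ [e.2])).modify e.2 [] (· ++ [e.1])) d = lrun (opsE es) d :=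
  foldl_lrun es (fun e => [.app e.1 e.2, .app e.2 e.1]) _ (fun _ _ => rfl) d

lemma hasIns_opsE (k : String) (es : List (String × String)) : hasIns k (opsE es) = false := by
  induction es with
  | nil => rfl
  | cons e r ih =>
    rw [opsE, List.flatMap_cons, hasIns_append, ← opsE, ih]
    rfl

lemma appsAt_opsE (k : String) (es : List (String × String))
    (h : ∀ e ∈ es, ¬ (e.1 = k ∧ e.2 = k)) : appsAt k (opsE es) = nbAt k es := by
  induction es with
  | nil => rfl
  | cons e r ih =>
    rw [opsE, List.flatMap_cons, appsAt_append, ← opsE,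
      ih (fun e he => h e (List.mem_cons_of_mem _ he)), nbAt_cons, nbAt_single]
    congr 1
    have he := h e List.mem_cons_self
    by_cases h1 : e.1 = k
    · have h2 : ¬ e.2 = k := fun h2 => he ⟨h1, h2⟩
      rw [appsAt_cons_app_eq h1, appsAt_cons_app_ne h2, appsAt_nil, if_pos h1]
    · rw [appsAt_cons_app_ne h1, if_neg h1]
      by_cases h2 : e.2 = k
      · rw [appsAt_cons_app_eq h2, appsAt_nil, if_pos h2]
      · rw [appsAt_cons_app_ne h2, appsAt_nil, if_neg h2]

lemma edgesL_ne (m q : Nat) : ∀ e ∈ edgesL m q, e.1 ≠ e.2 := by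
  intro e he
  rw [edgesL, List.mem_append] at he
  rcases he with hm | hm
  · rcases List.mem_map.1 hm with ⟨t, -, rfl⟩
    intro h
    rw [pvK_inj] at h
    omega
  · rcases List.mem_flatMap.1 hm with ⟨t, -, hbt⟩
    rcases List.mem_append.1 hbt with hs | hs <;>
      rcases List.mem_cons.1 hs with rfl | hm' <;>
      first
        | exact pvK_ne_cKs _ _ _
        | · rcases List.mem_map.1 hm' with ⟨j, -, rfl⟩
            exact cKs_ne_sKs _ _ _ _ _

lemma inc_getD (m q : Nat) (k : String) :
    (lrun (opsE (edgesL m q)) PySem.Dict.empty).getD k [] = nbAt k (edgesL m q) := by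
  rw [getD_lrun _ _ _ (okAt_of_no_ins (hasIns_opsE _ _)), hasIns_opsE,
    appsAt_opsE k _ (fun e he h' => edgesL_ne m q e he (h'.1.trans h'.2.symm))]
  simp [PySem.Dict.getD_empty]

lemma portB_spec (n p : Int) :
    construct_lobster_graph_alt n p = specL n.toNat ((p - 1).toNat) := by
  simp only [construct_lobster_graph_alt]
  set m := n.toNat with hm
  set q := (p - 1).toNat with hq
  have hl : ∀ (t : Nat) (c : Int) (cn : Nat), c = (cn : Int) →
      (PySem.List.pyRange 0 (p - 1) 1).map (fun j : Int =>
        "s_" ++ PySem.Int.toStr ((t : Int) + 1) ++ "_" ++ PySem.Int.toStr c ++ "_" ++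
          PySem.Int.toStr (j + 1)) = leavesS q t cn := by
    rintro t c cn rfl
    rw [pyRange_zero_toNat (p - 1), ← hq, List.map_map, leavesS]
    exact List.map_congr_left (fun j _ => rfl)
  have hc : ∀ (t : Nat) (c : Int) (cn : Nat), c = (cn : Int) →
      ("c_" ++ PySem.Int.toStr ((t : Int) + 1) ++ "_" ++ PySem.Int.toStr c) = cKs t cn := by
    rintro t c cn rfl
    rfl
  have hk0 : (PySem.List.pyRange 0 n 1).map (fun i => "v_" ++ PySem.Int.toStr (i + 1)) =
      (List.range m).map (fun t => pvK (t + 1)) := by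
    rw [pyRange_zero_toNat, List.map_map]
    exact List.map_congr_left (fun t _ => vkey_eq t)
  have hkeys : (PySem.List.pyRange 0 n 1).foldl (fun acc i =>
      [(1 : Int), 2].foldl (fun acc c =>
        (acc ++ ["c_" ++ PySem.Int.toStr (i + 1) ++ "_" ++ PySem.Int.toStr c]) ++
          (PySem.List.pyRange 0 (p - 1) 1).map (fun j =>
            "s_" ++ PySem.Int.toStr (i + 1) ++ "_" ++ PySem.Int.toStr c ++ "_" ++
              PySem.Int.toStr (j + 1))) acc)
      ((PySem.List.pyRange 0 n 1).map (fun i => "v_" ++ PySem.Int.toStr (i + 1))) =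
      (specL m q).map Prod.fst := by
    rw [hk0, specL_map_fst, pyRange_zero_toNat n, List.foldl_map]
    rw [PySem.List.foldl_congr_mem _ _ (fun acc t => acc ++ blockK q t) _ ?_]
    · rw [PySem.List.foldl_append_eq_flatMap]
    · intro acc t ht
      simp only [List.foldl_cons, List.foldl_nil]
      rw [hl t 1 1 (by norm_num), hl t 2 2 (by norm_num),
        hc t 1 1 (by norm_num), hc t 2 2 (by norm_num), blockK]
      simp [List.append_assoc]
  have he0 : (PySem.List.pyRange 0 (n - 1) 1).map (fun i =>
      ("v_" ++ PySem.Int.toStr (i + 1), "v_" ++ PySem.Int.toStr (i + 2))) =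
      (List.range (m - 1)).map (fun t => (pvK (t + 1), pvK (t + 2))) := by
    rw [pyRange_zero_toNat (n - 1), show (n - 1).toNat = m - 1 by omega, List.map_map]
    refine List.map_congr_left (fun t _ => ?_)
    show ("v_" ++ PySem.Int.toStr ((t : Int) + 1), "v_" ++ PySem.Int.toStr ((t : Int) + 2)) = _
    rw [vkey_eq, cast_two_add]
    rfl
  have hedges : (PySem.List.pyRange 0 n 1).foldl (fun acc i =>
      [(1 : Int), 2].foldl (fun acc c =>
        (acc ++ [("v_" ++ PySem.Int.toStr (i + 1),
                  "c_" ++ PySem.Int.toStr (i + 1) ++ "_" ++ PySem.Int.toStr c)]) ++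
          (PySem.List.pyRange 0 (p - 1) 1).map (fun j =>
            ("c_" ++ PySem.Int.toStr (i + 1) ++ "_" ++ PySem.Int.toStr c,
             "s_" ++ PySem.Int.toStr (i + 1) ++ "_" ++ PySem.Int.toStr c ++ "_" ++
               PySem.Int.toStr (j + 1)))) acc)
      ((PySem.List.pyRange 0 (n - 1) 1).map (fun i =>
        ("v_" ++ PySem.Int.toStr (i + 1), "v_" ++ PySem.Int.toStr (i + 2)))) =
      edgesL m q := by
    rw [he0, pyRange_zero_toNat n, List.foldl_map]
    rw [PySem.List.foldl_congr_mem _ _ (fun acc t => acc ++ blockE q t) _ ?_]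
    · rw [PySem.List.foldl_append_eq_flatMap, edgesL]
    · intro acc t ht
      have hpl : ∀ (c : Int) (cn : Nat), c = (cn : Int) →
          (PySem.List.pyRange 0 (p - 1) 1).map (fun j : Int =>
            ("c_" ++ PySem.Int.toStr ((t : Int) + 1) ++ "_" ++ PySem.Int.toStr c,
             "s_" ++ PySem.Int.toStr ((t : Int) + 1) ++ "_" ++ PySem.Int.toStr c ++ "_" ++
               PySem.Int.toStr (j + 1))) =
          (List.range q).map (fun j => (cKs t cn, sKs t cn j)) := by
        rintro c cn rfl
        rw [pyRange_zero_toNat (p - 1), ← hq, List.map_map]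
        exact List.map_congr_left (fun j _ => rfl)
      simp only [List.foldl_cons, List.foldl_nil]
      rw [hpl 1 1 (by norm_num), hpl 2 2 (by norm_num),
        hc t 1 1 (by norm_num), hc t 2 2 (by norm_num), vkey_eq, blockE, edgeStar, edgeStar]
      simp [List.append_assoc]
  rw [hkeys, hedges, foldl_inc]
  rw [show ((specL m q).map Prod.fst).map
        (fun k => (k, (lrun (opsE (edgesL m q)) PySem.Dict.empty).getD k [])) =
      ((specL m q).map Prod.fst).map (fun k => (k, nbAt k (edgesL m q))) from
    List.map_congr_left (fun k _ => by rw [inc_getD]), itemsB]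
  exact ofList_items _ (nodup_specKeys m q)

-- ===== VERDICT (by name: the statement is the Claim_ definition above) =====
theorem construct_lobster_graph_spec : Claim_equal_construct_lobster_graph := by
  intro n p _
  show construct_lobster_graph n p = construct_lobster_graph_alt n p
  rw [portA_lrun, itemsA, portB_spec]
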